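-- pv_equiv track=rewrite | github.com/Hydroxhari/Leet-Code | 3844-number-of-ways-to-assign-edge-weights-i/number-of-ways-to-assign-edge-weights-i.py | assignEdgeWeights
-- ===== SOURCE A (Python) =====
-- from collections import defaultdict, deque
--
-- def assignEdgeWeights(edges):
--     MOD = 10**9 + 7
--     n=len(edges)+1
--     # Step 1: Build tree
--     graph = defaultdict(list)
--     for u, v in edges:
--         graph[u].append(v)
--         graph[v].append(u)
--
--     # Step 2: Find depth of deepest node using BFS
--     depth = [0] * (n + 1)
--     visited = [False] * (n + 1)
--     queue = deque([(1, 0)])  # (node, depth)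
--
--     max_depth = 0
--
--     while queue:
--         node, d = queue.popleft()
--         visited[node] = True
--         depth[node] = d
--         max_depth = max(max_depth, d)
--         for nei in graph[node]:
--             if not visited[nei]:
--                 queue.append((nei, d + 1))
--
--     # Step 3: Compute number of ways
--     if max_depth == 0:
--         return 0  # no path to any deeper node
--
--     return pow(2, max_depth - 1, MOD)
-- ===== SOURCE B (Python) =====
-- def assignEdgeWeights(edges):
--     MOD = 10**9 + 7
--     # Order-independent depth labelling: start from the root and repeatedly
--     # sweep the edge list, assigning depth[child] = depth[known endpoint] + 1
--     # until a sweep changes nothing.  No adjacency list, no queue.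
--     depth = {1: 0}
--     changed = True
--     while changed:
--         changed = False
--         for u, v in edges:
--             if u in depth and v not in depth:
--                 depth[v] = depth[u] + 1
--                 changed = True
--             elif v in depth and u not in depth:
--                 depth[u] = depth[v] + 1
--                 changed = True
--     max_depth = max(depth.values())
--     if max_depth == 0:
--         return 0
--     return pow(2, max_depth - 1, MOD)
-- ===== Notes on version B (the rewrite author's own statement) =====
-- stated objective: alternative
-- what changed: B drops A's adjacency list, BFS queue and visited/depth index arrays entirely and instead grows a depth dictionary from the root by repeatedly sweeping the raw edge list until a sweep changes nothing (edge-list relaxation).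
-- outside the precondition, e.g. on assignEdgeWeights([(1, 2), (1, 3), (2, 3)]): A returns 2, B returns 1; on assignEdgeWeights([(1, 2), (1, 2)]): A returns 1, B returns 1; on assignEdgeWeights([(1, 2), (2, -2)]): A returns 1, B returns 2
import Mathlib
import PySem

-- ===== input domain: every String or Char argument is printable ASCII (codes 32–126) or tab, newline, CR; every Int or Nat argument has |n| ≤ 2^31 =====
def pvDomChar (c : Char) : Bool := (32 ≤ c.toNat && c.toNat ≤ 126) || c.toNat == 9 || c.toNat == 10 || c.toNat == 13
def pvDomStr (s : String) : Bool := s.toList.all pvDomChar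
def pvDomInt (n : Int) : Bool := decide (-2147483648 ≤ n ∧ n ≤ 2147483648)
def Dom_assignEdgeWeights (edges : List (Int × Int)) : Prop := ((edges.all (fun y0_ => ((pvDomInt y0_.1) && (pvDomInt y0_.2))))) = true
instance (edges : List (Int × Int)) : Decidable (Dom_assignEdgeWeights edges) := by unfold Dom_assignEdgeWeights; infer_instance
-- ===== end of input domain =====

-- B replaces A's adjacency-list BFS with queue and visited/depth arrays by an
-- order-independent edge-list relaxation: repeated sweeps over the edge list grow a
-- depth dictionary from the root until a sweep changes nothing (objective: alternative).

-- ===== PORT A =====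
def pvGraphA (edges : List (Int × Int)) : PySem.Dict Int (List Int) :=
  edges.foldl (fun g p => (g.modify p.1 [] (· ++ [p.2])).modify p.2 [] (· ++ [p.1]))
    PySem.Dict.empty

-- inner 'for nei in graph[node]' loop; none = IndexError on 'visited[nei]'
def pvEnqueueA (vis : List Bool) (d1 : Int) :
    List Int → List (Int × Int) → Option (List (Int × Int))
  | [], q => some q
  | nei :: rest, q =>
    match PySem.List.pyGet? vis nei with
    | none => none
    | some b => pvEnqueueA vis d1 rest (if b then q else q ++ [(nei, d1)])

-- 'while queue' loop; none = IndexError (or fuel exhausted, which Pre_ rules out)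
def pvBfsA (g : PySem.Dict Int (List Int)) :
    Nat → List (Int × Int) → List Bool → List Int → Int → Option Int
  | _, [], _, _, md => some md
  | 0, _ :: _, _, _, _ => none
  | fuel+1, (node, d) :: q, vis, dep, md =>
    match PySem.List.pySet? vis node true with
    | none => none
    | some vis' =>
      match PySem.List.pySet? dep node d with
      | none => none
      | some dep' =>
        match pvEnqueueA vis' (d + 1) (g.getD node []) q with
        | none => none
        | some q' => pvBfsA g fuel q' vis' dep' (max md d)

def assignEdgeWeights (edges : List (Int × Int)) : Int :=
  let M : Int := 10 ^ 9 + 7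
  let n := edges.length + 1
  match pvBfsA (pvGraphA edges) (2 * edges.length + 4) [(1, 0)]
      (List.replicate (n + 1) false) (List.replicate (n + 1) 0) 0 with
  | none => 0
  | some md => if md = 0 then 0 else PySem.Int.powMod 2 (md - 1).toNat M

-- ===== PORT B =====
-- one sweep of the edge list ('for u, v in edges: …'); returns (dict, changed)
def pvSweepB : List (Int × Int) → PySem.Dict Int Int → Bool → PySem.Dict Int Int × Bool
  | [], d, ch => (d, ch)
  | (u, v) :: es, d, ch =>
    if d.contains u && !(d.contains v) then
      pvSweepB es (d.insert v (d.getD u 0 + 1)) true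
    else if d.contains v && !(d.contains u) then
      pvSweepB es (d.insert u (d.getD v 0 + 1)) true
    else
      pvSweepB es d ch
-- 'while changed' loop; each changed sweep adds a key, so 2*len+2 sweeps always suffice
def pvRelaxB (edges : List (Int × Int)) : Nat → PySem.Dict Int Int → PySem.Dict Int Int
  | 0, d => d
  | fuel+1, d =>
    match pvSweepB edges d false with
    | (d', true) => pvRelaxB edges fuel d'
    | (d', false) => d'

def assignEdgeWeights_alt (edges : List (Int × Int)) : Int :=
  let M : Int := 10 ^ 9 + 7
  let depth := pvRelaxB edges (2 * edges.length + 2) (PySem.Dict.empty.insert 1 0)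
  let md := match PySem.List.max? depth.values (fun x => x) with
    | some m => m
    | none => 0   -- unreachable: the dict always holds key 1
  if md = 0 then 0 else PySem.Int.powMod 2 (md - 1).toNat M

-- ===== PRECONDITION & SPEC =====
-- pvUF: a standard union-find sweep over the edge list, maintaining the connected
-- components (each with a flag that records whether a self-loop, duplicate edge or
-- cycle was found inside it).  It is used only to STATE the precondition; it is not
-- the algorithm of either port.
def pvFindC (comps : List (Bool × List Int)) (u : Int) : Option (Bool × List Int) :=
  comps.find? (fun c => c.2.contains u)

def pvUF : List (Int × Int) → List (Bool × List Int) → List (Bool × List Int)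
  | [], comps => comps
  | (u, v) :: es, comps =>
    match pvFindC comps u, pvFindC comps v with
    | none, none =>
      if u = v then pvUF es ((true, [u]) :: comps)
      else pvUF es ((false, [u, v]) :: comps)
    | some cu, none =>
      pvUF es ((cu.1, cu.2 ++ [v]) :: comps.filter (fun c => !(c.2.contains u)))
    | none, some cv =>
      pvUF es ((cv.1, cv.2 ++ [u]) :: comps.filter (fun c => !(c.2.contains v)))
    | some cu, some cv =>
      if cu.2.contains v then
        pvUF es ((true, cu.2) :: comps.filter (fun c => !(c.2.contains u)))
      else
        pvUF es ((cu.1 || cv.1, cu.2 ++ cv.2) ::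
          comps.filter (fun c => !(c.2.contains u) && !(c.2.contains v)))

-- Pre_ excludes inputs whose node-1 component contains a duplicate edge or a cycle, on
-- which A's stale BFS-queue entries make its returned value an accident of the
-- bookkeeping, and inputs whose node-1 component has a node outside 0..len(edges)+1, on
-- which A either raises IndexError or silently wraps a negative index onto another
-- node's visited slot.  Edges not connected to node 1 (any shape, any labels) are
-- unconstrained: Pre_ only restricts the connected component of node 1.
def Pre_assignEdgeWeights (edges : List (Int × Int)) : Prop :=
  ∀ c ∈ pvUF edges [], 1 ∈ c.2 →
    c.1 = false ∧ ∀ x ∈ c.2, 0 ≤ x ∧ x ≤ (edges.length : Int) + 1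

instance (edges : List (Int × Int)) : Decidable (Pre_assignEdgeWeights edges) := by
  unfold Pre_assignEdgeWeights; infer_instance

def pvWitness_assignEdgeWeights : (List (Int × Int)) := [(1, 2), (2, 3), (1, 4)]

def Spec_assignEdgeWeights (edges : List (Int × Int)) (out : Int) : Prop := out = assignEdgeWeights_alt edges
instance (edges : List (Int × Int)) (out : Int) : Decidable (Spec_assignEdgeWeights edges out) := by unfold Spec_assignEdgeWeights; infer_instance

-- ===== CLAIM (what is proved, stated in full; the proofs are below) =====
def Claim_equal_assignEdgeWeights : Prop := ∀ (edges : List (Int × Int)), Dom_assignEdgeWeights edges → Pre_assignEdgeWeights edges → Spec_assignEdgeWeights edges (assignEdgeWeights edges)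

-- ===== LEMMAS AND PROOFS =====

-- ---- ghost notions: undirected adjacency, walks from the root, connectivity ----
def pvEdgeR (edges : List (Int × Int)) (x y : Int) : Prop := (x, y) ∈ edges ∨ (y, x) ∈ edges

-- walks from node 1 of a given length
inductive pvWk (edges : List (Int × Int)) : Int → Nat → Prop
  | root : pvWk edges 1 0
  | step {u v : Int} {k : Nat} : pvWk edges u k → pvEdgeR edges u v → pvWk edges v (k + 1)

-- connectivity (reflexive-transitive closure of adjacency)
inductive pvRch (edges : List (Int × Int)) : Int → Int → Prop
  | refl (x : Int) : pvRch edges x x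
  | tail {x y z : Int} : pvRch edges x y → pvEdgeR edges y z → pvRch edges x z

-- depth of a node = length of a shortest walk from node 1 (0 if unreachable)
noncomputable def pvDp (edges : List (Int × Int)) (x : Int) : Nat :=
  @dite _ (∃ k, pvWk edges x k) (Classical.propDecidable _)
    (fun h => @Nat.find _ (fun k => Classical.propDecidable _) h) (fun _ => 0)

-- the rooted-tree facts about the component K of node 1 that both ports' proofs consume
structure PvTree (edges : List (Int × Int)) (K : List Int) (Dp : Int → Nat) : Prop where
  ndK : K.Nodup
  oneK : 1 ∈ K
  bnd : ∀ x ∈ K, 0 ≤ x ∧ x ≤ (edges.length : Int) + 1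
  d1 : Dp 1 = 0
  root0 : ∀ v ∈ K, Dp v = 0 → v = 1
  edgeK : ∀ p ∈ edges, (p.1 ∈ K ∨ p.2 ∈ K) →
    p.1 ∈ K ∧ p.2 ∈ K ∧ (Dp p.1 = Dp p.2 + 1 ∨ Dp p.2 = Dp p.1 + 1)
  par_ex : ∀ v ∈ K, v ≠ 1 → ∃ p, p ∈ K ∧ pvEdgeR edges p v ∧ Dp v = Dp p + 1
  par_un : ∀ v ∈ K, ∀ p p', pvEdgeR edges p v → pvEdgeR edges p' v →
    Dp v = Dp p + 1 → Dp v = Dp p' + 1 → p = p'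
  adj_nd : ∀ x ∈ K, ((pvGraphA edges).getD x []).Nodup
  klen : K.length ≤ edges.length + 1

def pvPar (edges : List (Int × Int)) (Dp : Int → Nat) (x p : Int) : Prop :=
  pvEdgeR edges x p ∧ Dp x = Dp p + 1

def pvMaxD (K : List Int) (Dp : Int → Nat) : Int :=
  (K.map (fun x => (Dp x : Int))).foldl max 0

-- ---- elementary facts about walks, connectivity and pvDp ----
lemma pvEdgeR_mono {pr : List (Int × Int)} (e : Int × Int) {x y : Int}
    (h : pvEdgeR pr x y) : pvEdgeR (pr ++ [e]) x y := by
  rcases h with h | h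
  · exact Or.inl (List.mem_append_left _ h)
  · exact Or.inr (List.mem_append_left _ h)

lemma pvEdgeR_last (pr : List (Int × Int)) (u v : Int) :
    pvEdgeR (pr ++ [(u, v)]) u v :=
  Or.inl (List.mem_append_right _ (by simp))

lemma pvEdgeR_symm' {pr : List (Int × Int)} {x y : Int} (h : pvEdgeR pr x y) :
    pvEdgeR pr y x := h.symm

lemma pvRch_mono {pr : List (Int × Int)} (e : Int × Int) {x y : Int}
    (h : pvRch pr x y) : pvRch (pr ++ [e]) x y := by
  induction h with
  | refl => exact pvRch.refl _
  | tail _ hadj ih => exact pvRch.tail ih (pvEdgeR_mono e hadj)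

lemma pvRch_trans {pr : List (Int × Int)} {x y z : Int}
    (h1 : pvRch pr x y) (h2 : pvRch pr y z) : pvRch pr x z := by
  induction h2 with
  | refl => exact h1
  | tail _ hadj ih => exact pvRch.tail ih hadj

lemma pvRch_single {pr : List (Int × Int)} {x y : Int} (h : pvEdgeR pr x y) :
    pvRch pr x y := pvRch.tail (pvRch.refl x) h

lemma pvRch_to_wk {edges : List (Int × Int)} {x : Int} (h : pvRch edges 1 x) :
    ∃ k, pvWk edges x k := by
  induction h with
  | refl => exact ⟨0, pvWk.root⟩
  | tail _ hadj ih =>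
    obtain ⟨k, hk⟩ := ih
    exact ⟨k + 1, pvWk.step hk hadj⟩

lemma pvDp_spec {edges : List (Int × Int)} {x : Int} (h : ∃ k, pvWk edges x k) :
    pvWk edges x (pvDp edges x) := by
  rw [pvDp, dif_pos h]
  exact @Nat.find_spec (fun k => pvWk edges x k) (fun k => Classical.propDecidable _) h

lemma pvDp_min {edges : List (Int × Int)} {x : Int} (h : ∃ k, pvWk edges x k)
    {k : Nat} (hk : pvWk edges x k) : pvDp edges x ≤ k := by
  rw [pvDp, dif_pos h]
  exact @Nat.find_min' (fun k => pvWk edges x k) (fun k => Classical.propDecidable _) h k hk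

lemma pvDp_one (edges : List (Int × Int)) : pvDp edges 1 = 0 :=
  Nat.le_zero.mp (pvDp_min ⟨0, pvWk.root⟩ pvWk.root)

lemma pvDp_zero {edges : List (Int × Int)} {x : Int} (h : ∃ k, pvWk edges x k)
    (h0 : pvDp edges x = 0) : x = 1 := by
  have hw := pvDp_spec h
  rw [h0] at hw
  cases hw
  rfl

lemma pvDp_succ_inv {edges : List (Int × Int)} {x : Int} (h : ∃ k, pvWk edges x k)
    {k : Nat} (hk : pvDp edges x = k + 1) :
    ∃ u, pvEdgeR edges u x ∧ (∃ j, pvWk edges u j) ∧ pvDp edges u = k := by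
  have hw := pvDp_spec h
  rw [hk] at hw
  cases hw with
  | step hu hadj =>
    rename_i u
    have hRu : ∃ j, pvWk edges u j := ⟨k, hu⟩
    refine ⟨u, hadj, hRu, ?_⟩
    have hle : pvDp edges u ≤ k := pvDp_min hRu hu
    rcases Nat.lt_or_ge (pvDp edges u) k with hlt | hge
    · exfalso
      have hwx : pvWk edges x (pvDp edges u + 1) := pvWk.step (pvDp_spec hRu) hadj
      have := pvDp_min h hwx
      omega
    · omega

-- ---- generic counting helpers ----
lemma pvSumMapAdd {β : Type} (V : List β) (a b : β → Nat) :
    (V.map (fun v => a v + b v)).sum = (V.map a).sum + (V.map b).sum := by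
  induction V with
  | nil => rfl
  | cons v V ih => simp [ih]; omega

lemma pvSumIte {β : Type} [DecidableEq β] (p : β → Bool) :
    ∀ (V : List β), V.Nodup → (∀ v v', p v = true → p v' = true → v = v') →
    (V.map (fun v => if p v then 1 else 0)).sum = (if ∃ v ∈ V, p v = true then 1 else 0) := by
  intro V
  induction V with
  | nil => intro _ _; simp
  | cons v V ih =>
    intro hnd huniq
    have hnd' := (List.nodup_cons.mp hnd)
    by_cases hv : p v = true
    · have hrest : (V.map (fun w => if p w then 1 else 0)).sum = 0 := by
        apply List.sum_eq_zero
        intro x hx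
        obtain ⟨w, hw, hwx⟩ := List.mem_map.mp hx
        by_cases hpw : p w = true
        · exact absurd (huniq w v hpw hv ▸ hw) hnd'.1
        · simp [hpw] at hwx
          omega
      have hex : ∃ w ∈ v :: V, p w = true := ⟨v, by simp, hv⟩
      simp [hv, hrest, hex]
    · have : (∃ w ∈ v :: V, p w = true) ↔ (∃ w ∈ V, p w = true) := by
        constructor
        · rintro ⟨w, hw, hpw⟩
          rcases List.mem_cons.mp hw with rfl | hw'
          · exact absurd hpw hv
          · exact ⟨w, hw', hpw⟩
        · rintro ⟨w, hw, hpw⟩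
          exact ⟨w, by simp [hw], hpw⟩
      rw [List.map_cons, List.sum_cons, if_neg (by simp [hv]), ih hnd'.2 huniq]
      simp only [this]
      omega

lemma pvSumCount {α β : Type} [DecidableEq β] (f : α → β → Bool) :
    ∀ (L : List α) (V : List β), V.Nodup →
    (∀ p v v', f p v = true → f p v' = true → v = v') →
    (V.map (fun v => L.countP (fun p => f p v))).sum
      = L.countP (fun p => decide (∃ v ∈ V, f p v = true)) := by
  intro L
  induction L with
  | nil =>
    intro V _ _
    simp
  | cons p L ih =>
    intro V hnd huniq
    have hc : ∀ v, ((p :: L).countP (fun q => f q v))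
        = L.countP (fun q => f q v) + (if f p v then 1 else 0) := by
      intro v
      rw [List.countP_cons]
    simp only [hc]
    rw [pvSumMapAdd, ih V hnd huniq, pvSumIte (fun v => f p v) V hnd
      (fun v v' h1 h2 => huniq p v v' h1 h2)]
    rw [List.countP_cons]
    simp only [decide_eq_true_eq]

lemma pvSumGeLen {β : Type} (V : List β) (h : β → Nat) (hge : ∀ v ∈ V, 1 ≤ h v) :
    V.length ≤ (V.map h).sum := by
  induction V with
  | nil => simp
  | cons v V ih =>
    simp only [List.map_cons, List.sum_cons, List.length_cons]
    have := hge v (by simp)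
    have := ih (fun w hw => hge w (by simp [hw]))
    omega

lemma pvSumAllOne {β : Type} (h : β → Nat) :
    ∀ (V : List β), (∀ v ∈ V, 1 ≤ h v) → (V.map h).sum ≤ V.length →
    ∀ v ∈ V, h v = 1 := by
  intro V
  induction V with
  | nil => intro _ _ v hv; simp at hv
  | cons w V ih =>
    intro hge hle v hv
    simp only [List.map_cons, List.sum_cons, List.length_cons] at hle
    have h1 := hge w (by simp)
    have h2 := pvSumGeLen V h (fun z hz => hge z (by simp [hz]))
    rcases List.mem_cons.mp hv with rfl | hv'
    · omega
    · exact ih (fun z hz => hge z (by simp [hz])) (by omega) v hv'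

lemma pvTwoCountP {α : Type} [DecidableEq α] (f : α → Bool) :
    ∀ (L : List α) (a b : α), a ≠ b → a ∈ L → b ∈ L → f a = true → f b = true →
    2 ≤ L.countP f := by
  intro L
  induction L with
  | nil => intro a b _ ha _ _ _; simp at ha
  | cons x L ih =>
    intro a b hab ha hb hfa hfb
    rw [List.countP_cons]
    by_cases hxa : x = a
    · subst hxa
      have hbL : b ∈ L := by
        rcases List.mem_cons.mp hb with rfl | h
        · exact absurd rfl hab
        · exact h
      have h1 : 0 < L.countP f := List.countP_pos_iff.mpr ⟨b, hbL, hfb⟩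
      simp only [hfa, if_true]
      omega
    · by_cases hxb : x = b
      · subst hxb
        have haL : a ∈ L := by
          rcases List.mem_cons.mp ha with rfl | h
          · exact absurd rfl hab
          · exact h
        have h1 : 0 < L.countP f := List.countP_pos_iff.mpr ⟨a, haL, hfa⟩
        simp only [hfb, if_true]
        omega
      · have haL : a ∈ L := by
          rcases List.mem_cons.mp ha with h | h
          · exact absurd h.symm hxa
          · exact h
        have hbL : b ∈ L := by
          rcases List.mem_cons.mp hb with h | h
          · exact absurd h.symm hxb
          · exact h
        have := ih a b hab haL hbL hfa hfb
        omega

lemma pvCountLe {α : Type} [BEq α] [LawfulBEq α] (f : α → Bool) (L : List α) (a : α)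
    (hfa : f a = true) : L.count a ≤ L.countP f := by
  induction L with
  | nil => simp
  | cons x L ih =>
    rw [List.count_cons, List.countP_cons]
    split_ifs with h1 h2 <;>
      first
        | omega
        | exact absurd ((show x = a from by simpa using h1).symm ▸ hfa) h2
        | exact absurd ((show a = x from by simpa using h1) ▸ hfa) h2

-- ---- the union-find invariant ----
structure PvUFInv (pr : List (Int × Int)) (comps : List (Bool × List Int)) : Prop where
  ne : ∀ c ∈ comps, c.2 ≠ []
  nd : ∀ c ∈ comps, c.2.Nodup
  disj : comps.Pairwise (fun c c' => ∀ x, x ∈ c.2 → x ∉ c'.2)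
  cover : ∀ p ∈ pr, ∃ c ∈ comps, p.1 ∈ c.2 ∧ p.2 ∈ c.2
  conn : ∀ c ∈ comps, ∀ x ∈ c.2, ∀ y ∈ c.2, pvRch pr x y
  cnt : ∀ c ∈ comps, c.1 = false →
    pr.countP (fun p => decide (p.1 ∈ c.2)) + 1 = c.2.length

lemma pvDisjAll {comps : List (Bool × List Int)}
    (h : comps.Pairwise (fun c c' => ∀ x, x ∈ c.2 → x ∉ c'.2)) :
    ∀ c ∈ comps, ∀ c' ∈ comps, c ≠ c' → ∀ x, x ∈ c.2 → x ∉ c'.2 := by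
  have hsym : Symmetric (fun (c c' : Bool × List Int) => ∀ x, x ∈ c.2 → x ∉ c'.2) := by
    intro a b hab x hx hx'
    exact hab x hx' hx
  intro c hc c' hc' hne
  exact List.Pairwise.forall hsym h hc hc' hne

lemma pvCompUnique {comps : List (Bool × List Int)}
    (h : comps.Pairwise (fun c c' => ∀ x, x ∈ c.2 → x ∉ c'.2))
    {c c' : Bool × List Int} (hc : c ∈ comps) (hc' : c' ∈ comps)
    {x : Int} (hx : x ∈ c.2) (hx' : x ∈ c'.2) : c = c' := by
  by_contra hne
  exact pvDisjAll h c hc c' hc' hne x hx hx'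

lemma pvCountPCongr {α : Type} (pr : List α) (f g : α → Bool)
    (h : ∀ p ∈ pr, f p = g p) : pr.countP f = pr.countP g := by
  induction pr with
  | nil => rfl
  | cons p pr ih =>
    rw [List.countP_cons, List.countP_cons, h p (by simp),
      ih (fun q hq => h q (by simp [hq]))]

lemma pvCountPSplit (pr : List (Int × Int)) (A B : List Int)
    (hdisj : ∀ x, x ∈ A → x ∉ B) :
    pr.countP (fun p => decide (p.1 ∈ A ++ B))
      = pr.countP (fun p => decide (p.1 ∈ A)) + pr.countP (fun p => decide (p.1 ∈ B)) := by
  induction pr with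
  | nil => simp
  | cons p pr ih =>
    simp only [List.countP_cons, ih]
    by_cases hA : p.1 ∈ A
    · have hB : p.1 ∉ B := hdisj _ hA
      simp [hA, hB]
      omega
    · by_cases hB : p.1 ∈ B <;> simp [hA, hB] <;> omega

lemma pvConnUnion {pr : List (Int × Int)} {e : Int × Int} {A B : List Int} {u v : Int}
    (hu : u ∈ A) (hv : v ∈ B)
    (hA : ∀ x ∈ A, ∀ y ∈ A, pvRch pr x y) (hB : ∀ x ∈ B, ∀ y ∈ B, pvRch pr x y)
    (huv : pvEdgeR (pr ++ [e]) u v) :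
    ∀ x ∈ A ++ B, ∀ y ∈ A ++ B, pvRch (pr ++ [e]) x y := by
  have hA' : ∀ x ∈ A, ∀ y ∈ A, pvRch (pr ++ [e]) x y :=
    fun x hx y hy => pvRch_mono e (hA x hx y hy)
  have hB' : ∀ x ∈ B, ∀ y ∈ B, pvRch (pr ++ [e]) x y :=
    fun x hx y hy => pvRch_mono e (hB x hx y hy)
  intro x hx y hy
  rcases List.mem_append.mp hx with hxA | hxB <;> rcases List.mem_append.mp hy with hyA | hyB
  · exact hA' x hxA y hyA
  · exact pvRch_trans (pvRch_trans (hA' x hxA u hu) (pvRch_single huv)) (hB' v hv y hyB)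
  · exact pvRch_trans (pvRch_trans (hB' x hxB v hv) (pvRch_single (pvEdgeR_symm' huv)))
      (hA' u hu y hyA)
  · exact hB' x hxB y hyB

lemma pvUF_run : ∀ (es pr : List (Int × Int)) (comps : List (Bool × List Int)),
    PvUFInv pr comps → PvUFInv (pr ++ es) (pvUF es comps) := by
  intro es
  induction es with
  | nil =>
    intro pr comps h
    simpa using h
  | cons e es ih =>
    rcases e with ⟨u, v⟩
    intro pr comps hinv
    obtain ⟨hne, hnd, hdisj, hcover, hconn, hcnt⟩ := hinv
    have hlast : pvEdgeR (pr ++ [(u, v)]) u v := pvEdgeR_last pr u v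
    have hcntApp : ∀ (A : List Int),
        (pr ++ [(u, v)]).countP (fun p => decide (p.1 ∈ A))
          = pr.countP (fun p => decide (p.1 ∈ A)) + (if u ∈ A then 1 else 0) := by
      intro A
      rw [List.countP_append]
      simp [List.countP_cons]
    rw [List.append_cons]
    cases hFu : pvFindC comps u with
    | none =>
      have hFu' : ∀ c ∈ comps, u ∉ c.2 := by
        intro c hc hm
        have h2 := List.find?_eq_none.mp hFu c hc
        simp only [List.contains_iff_mem] at h2
        exact h2 hm
      cases hFv : pvFindC comps v with
      | none =>
        have hFv' : ∀ c ∈ comps, v ∉ c.2 := by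
          intro c hc hm
          have h2 := List.find?_eq_none.mp hFv c hc
          simp only [List.contains_iff_mem] at h2
          exact h2 hm
        have hfresh : ∀ p ∈ pr, p.1 ≠ u ∧ p.1 ≠ v := by
          intro p hp
          obtain ⟨c, hc, h1, _⟩ := hcover p hp
          exact ⟨fun h => hFu' c hc (h ▸ h1), fun h => hFv' c hc (h ▸ h1)⟩
        by_cases huv : u = v
        · -- self loop on fresh vertex: bad singleton component
          subst huv
          have hred : pvUF ((u, u) :: es) comps = pvUF es ((true, [u]) :: comps) := by
            simp [pvUF, hFu]
          rw [hred]
          apply ih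
          refine ⟨?_, ?_, ?_, ?_, ?_, ?_⟩
          · intro c hc
            rcases List.mem_cons.mp hc with rfl | hc'
            · simp
            · exact hne c hc'
          · intro c hc
            rcases List.mem_cons.mp hc with rfl | hc'
            · simp
            · exact hnd c hc'
          · refine List.Pairwise.cons ?_ hdisj
            intro c' hc' x hx
            simp only [List.mem_singleton] at hx
            subst hx
            exact fun hm => hFu' c' hc' hm
          · intro p hp
            rcases List.mem_append.mp hp with hp' | hp'
            · obtain ⟨c, hc, h1, h2⟩ := hcover p hp'
              exact ⟨c, List.mem_cons_of_mem _ hc, h1, h2⟩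
            · simp only [List.mem_singleton] at hp'
              subst hp'
              exact ⟨(true, [u]), by simp, by simp, by simp⟩
          · intro c hc x hx y hy
            rcases List.mem_cons.mp hc with rfl | hc'
            · simp only [List.mem_singleton] at hx hy
              subst hx; subst hy
              exact pvRch.refl _
            · exact pvRch_mono _ (hconn c hc' x hx y hy)
          · intro c hc hflag
            rcases List.mem_cons.mp hc with rfl | hc'
            · simp at hflag
            · rw [hcntApp]
              rw [if_neg (hFu' c hc')]
              simpa using hcnt c hc' hflag
        · -- fresh edge: new two-element component
          have hred : pvUF ((u, v) :: es) comps = pvUF es ((false, [u, v]) :: comps) := by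
            simp [pvUF, hFu, hFv, huv]
          rw [hred]
          apply ih
          refine ⟨?_, ?_, ?_, ?_, ?_, ?_⟩
          · intro c hc
            rcases List.mem_cons.mp hc with rfl | hc'
            · simp
            · exact hne c hc'
          · intro c hc
            rcases List.mem_cons.mp hc with rfl | hc'
            · simp [huv]
            · exact hnd c hc'
          · refine List.Pairwise.cons ?_ hdisj
            intro c' hc' x hx
            rcases List.mem_cons.mp hx with rfl | hx'
            · exact fun hm => hFu' c' hc' hm
            · simp only [List.mem_singleton] at hx'
              subst hx'
              exact fun hm => hFv' c' hc' hm
          · intro p hp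
            rcases List.mem_append.mp hp with hp' | hp'
            · obtain ⟨c, hc, h1, h2⟩ := hcover p hp'
              exact ⟨c, List.mem_cons_of_mem _ hc, h1, h2⟩
            · simp only [List.mem_singleton] at hp'
              subst hp'
              exact ⟨(false, [u, v]), by simp, by simp, by simp⟩
          · intro c hc x hx y hy
            rcases List.mem_cons.mp hc with rfl | hc'
            · have := pvConnUnion (pr := pr) (e := (u, v)) (A := [u]) (B := [v])
                (by simp) (by simp)
                (by intro x hx y hy
                    simp only [List.mem_singleton] at hx hy
                    subst hx; subst hy; exact pvRch.refl _)
                (by intro x hx y hy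
                    simp only [List.mem_singleton] at hx hy
                    subst hx; subst hy; exact pvRch.refl _)
                hlast
              exact this x (by simpa using hx) y (by simpa using hy)
            · exact pvRch_mono _ (hconn c hc' x hx y hy)
          · intro c hc hflag
            rcases List.mem_cons.mp hc with rfl | hc'
            · rw [hcntApp]
              have h0 : pr.countP (fun p => decide (p.1 ∈ ([u, v] : List Int))) = 0 := by
                rw [List.countP_eq_zero]
                intro p hp
                obtain ⟨h1, h2⟩ := hfresh p hp
                simp [h1, h2]
              rw [h0]
              simp
            · rw [hcntApp]
              have hu' : u ∉ c.2 := hFu' c hc'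
              rw [if_neg hu']
              simpa using hcnt c hc' hflag
      | some cv =>
        -- v's component absorbs fresh u
        have hcvM : cv ∈ comps := List.mem_of_find?_eq_some hFv
        have hcvV : v ∈ cv.2 := by
          have := List.find?_some hFv
          simpa [List.contains_iff_mem] using this
        have hred : pvUF ((u, v) :: es) comps =
            pvUF es ((cv.1, cv.2 ++ [u]) :: comps.filter (fun c => !(c.2.contains v))) := by
          simp [pvUF, hFu, hFv]
        rw [hred]
        apply ih
        have hsurv : ∀ c ∈ comps.filter (fun c => !(c.2.contains v)), c ∈ comps ∧ v ∉ c.2 := by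
          intro c hc
          have h' := List.mem_filter.mp hc
          refine ⟨h'.1, ?_⟩
          have := h'.2
          simpa [List.contains_iff_mem] using this
        have hsurvNe : ∀ c ∈ comps.filter (fun c => !(c.2.contains v)), c ≠ cv := by
          intro c hc hceq
          exact (hsurv c hc).2 (hceq ▸ hcvV)
        refine ⟨?_, ?_, ?_, ?_, ?_, ?_⟩
        · intro c hc
          rcases List.mem_cons.mp hc with rfl | hc'
          · simp
          · exact hne c (hsurv c hc').1
        · intro c hc
          rcases List.mem_cons.mp hc with rfl | hc'
          · exact (hnd cv hcvM).append (List.nodup_singleton _)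
              (by simpa [List.disjoint_singleton] using hFu' cv hcvM)
          · exact hnd c (hsurv c hc').1
        · refine List.Pairwise.cons ?_
            (List.Pairwise.sublist List.filter_sublist hdisj)
          intro c' hc' x hx
          obtain ⟨hc'M, hc'v⟩ := hsurv c' hc'
          rcases List.mem_append.mp hx with hxcv | hxu
          · exact pvDisjAll hdisj cv hcvM c' hc'M (fun h => hc'v (h ▸ hcvV)) x hxcv
          · simp only [List.mem_singleton] at hxu
            subst hxu
            exact fun hm => hFu' c' hc'M hm
        · intro p hp
          rcases List.mem_append.mp hp with hp' | hp'
          · obtain ⟨c, hc, h1, h2⟩ := hcover p hp'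
            by_cases hceq : c = cv
            · subst hceq
              exact ⟨(c.1, c.2 ++ [u]), by simp, List.mem_append_left _ h1,
                List.mem_append_left _ h2⟩
            · have hcv' : v ∉ c.2 := fun hm => hceq (pvCompUnique hdisj hc hcvM hm hcvV)
              refine ⟨c, List.mem_cons_of_mem _ (List.mem_filter.mpr ⟨hc, ?_⟩), h1, h2⟩
              simpa [List.contains_iff_mem] using hcv'
          · simp only [List.mem_singleton] at hp'
            subst hp'
            exact ⟨(cv.1, cv.2 ++ [u]), by simp, by simp, List.mem_append_left _ hcvV⟩
        · intro c hc x hx y hy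
          rcases List.mem_cons.mp hc with rfl | hc'
          · have := pvConnUnion (pr := pr) (e := (u, v)) (A := cv.2) (B := [u])
              hcvV (by simp) (hconn cv hcvM)
              (by intro x hx y hy
                  simp only [List.mem_singleton] at hx hy
                  subst hx; subst hy; exact pvRch.refl _)
              (pvEdgeR_symm' hlast)
            exact this x hx y hy
          · exact pvRch_mono _ (hconn c (hsurv c hc').1 x hx y hy)
        · intro c hc hflag
          rcases List.mem_cons.mp hc with rfl | hc'
          · simp only at hflag
            rw [hcntApp]
            have hcongr : pr.countP (fun p => decide (p.1 ∈ cv.2 ++ [u]))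
                = pr.countP (fun p => decide (p.1 ∈ cv.2)) := by
              apply pvCountPCongr
              intro p hp
              have hpu : p.1 ≠ u := by
                intro h
                obtain ⟨c0, hc0, h1, _⟩ := hcover p hp
                exact hFu' c0 hc0 (h ▸ h1)
              simp [hpu]
            rw [hcongr, if_pos (List.mem_append_right _ (by simp))]
            have := hcnt cv hcvM hflag
            simp only [List.length_append, List.length_singleton]
            omega
          · rw [hcntApp]
            rw [if_neg (hFu' c (hsurv c hc').1)]
            simpa using hcnt c (hsurv c hc').1 hflag
    | some cu =>
      have hcuM : cu ∈ comps := List.mem_of_find?_eq_some hFu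
      have hcuU : u ∈ cu.2 := by
        have := List.find?_some hFu
        simpa [List.contains_iff_mem] using this
      cases hFv : pvFindC comps v with
      | none =>
        -- u's component absorbs fresh v
        have hFv' : ∀ c ∈ comps, v ∉ c.2 := by
          intro c hc hm
          have h2 := List.find?_eq_none.mp hFv c hc
          simp only [List.contains_iff_mem] at h2
          exact h2 hm
        have hred : pvUF ((u, v) :: es) comps =
            pvUF es ((cu.1, cu.2 ++ [v]) :: comps.filter (fun c => !(c.2.contains u))) := by
          simp [pvUF, hFu, hFv]
        rw [hred]
        apply ih
        have hsurv : ∀ c ∈ comps.filter (fun c => !(c.2.contains u)), c ∈ comps ∧ u ∉ c.2 := by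
          intro c hc
          have h' := List.mem_filter.mp hc
          refine ⟨h'.1, ?_⟩
          have := h'.2
          simpa [List.contains_iff_mem] using this
        refine ⟨?_, ?_, ?_, ?_, ?_, ?_⟩
        · intro c hc
          rcases List.mem_cons.mp hc with rfl | hc'
          · simp
          · exact hne c (hsurv c hc').1
        · intro c hc
          rcases List.mem_cons.mp hc with rfl | hc'
          · exact (hnd cu hcuM).append (List.nodup_singleton _)
              (by simpa [List.disjoint_singleton] using hFv' cu hcuM)
          · exact hnd c (hsurv c hc').1
        · refine List.Pairwise.cons ?_
            (List.Pairwise.sublist List.filter_sublist hdisj)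
          intro c' hc' x hx
          obtain ⟨hc'M, hc'u⟩ := hsurv c' hc'
          rcases List.mem_append.mp hx with hxcu | hxv
          · exact pvDisjAll hdisj cu hcuM c' hc'M (fun h => hc'u (h ▸ hcuU)) x hxcu
          · simp only [List.mem_singleton] at hxv
            subst hxv
            exact fun hm => hFv' c' hc'M hm
        · intro p hp
          rcases List.mem_append.mp hp with hp' | hp'
          · obtain ⟨c, hc, h1, h2⟩ := hcover p hp'
            by_cases hceq : c = cu
            · subst hceq
              exact ⟨(c.1, c.2 ++ [v]), by simp, List.mem_append_left _ h1,
                List.mem_append_left _ h2⟩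
            · have hcu' : u ∉ c.2 := fun hm => hceq (pvCompUnique hdisj hc hcuM hm hcuU)
              refine ⟨c, List.mem_cons_of_mem _ (List.mem_filter.mpr ⟨hc, ?_⟩), h1, h2⟩
              simpa [List.contains_iff_mem] using hcu'
          · simp only [List.mem_singleton] at hp'
            subst hp'
            exact ⟨(cu.1, cu.2 ++ [v]), by simp, List.mem_append_left _ hcuU, by simp⟩
        · intro c hc x hx y hy
          rcases List.mem_cons.mp hc with rfl | hc'
          · have := pvConnUnion (pr := pr) (e := (u, v)) (A := cu.2) (B := [v])
              hcuU (by simp) (hconn cu hcuM)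
              (by intro x hx y hy
                  simp only [List.mem_singleton] at hx hy
                  subst hx; subst hy; exact pvRch.refl _)
              hlast
            exact this x hx y hy
          · exact pvRch_mono _ (hconn c (hsurv c hc').1 x hx y hy)
        · intro c hc hflag
          rcases List.mem_cons.mp hc with rfl | hc'
          · simp only at hflag
            rw [hcntApp]
            have hcongr : pr.countP (fun p => decide (p.1 ∈ cu.2 ++ [v]))
                = pr.countP (fun p => decide (p.1 ∈ cu.2)) := by
              apply pvCountPCongr
              intro p hp
              have hpv : p.1 ≠ v := by
                intro h
                obtain ⟨c0, hc0, h1, _⟩ := hcover p hp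
                exact hFv' c0 hc0 (h ▸ h1)
              simp [hpv]
            rw [hcongr, if_pos (List.mem_append_left _ hcuU)]
            have := hcnt cu hcuM hflag
            simp only [List.length_append, List.length_singleton]
            omega
          · rw [hcntApp]
            rw [if_neg ((hsurv c hc').2)]
            simpa using hcnt c (hsurv c hc').1 hflag
      | some cv =>
        have hcvM : cv ∈ comps := List.mem_of_find?_eq_some hFv
        have hcvV : v ∈ cv.2 := by
          have := List.find?_some hFv
          simpa [List.contains_iff_mem] using this
        by_cases hsame : v ∈ cu.2
        · -- u and v already connected: the component becomes bad
          have hred : pvUF ((u, v) :: es) comps =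
              pvUF es ((true, cu.2) :: comps.filter (fun c => !(c.2.contains u))) := by
            simp [pvUF, hFu, hFv, List.contains_iff_mem, hsame]
          rw [hred]
          apply ih
          have hsurv : ∀ c ∈ comps.filter (fun c => !(c.2.contains u)), c ∈ comps ∧ u ∉ c.2 := by
            intro c hc
            have h' := List.mem_filter.mp hc
            refine ⟨h'.1, ?_⟩
            have := h'.2
            simpa [List.contains_iff_mem] using this
          refine ⟨?_, ?_, ?_, ?_, ?_, ?_⟩
          · intro c hc
            rcases List.mem_cons.mp hc with rfl | hc'
            · exact hne cu hcuM
            · exact hne c (hsurv c hc').1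
          · intro c hc
            rcases List.mem_cons.mp hc with rfl | hc'
            · exact hnd cu hcuM
            · exact hnd c (hsurv c hc').1
          · refine List.Pairwise.cons ?_
              (List.Pairwise.sublist List.filter_sublist hdisj)
            intro c' hc' x hx
            obtain ⟨hc'M, hc'u⟩ := hsurv c' hc'
            exact pvDisjAll hdisj cu hcuM c' hc'M (fun h => hc'u (h ▸ hcuU)) x hx
          · intro p hp
            rcases List.mem_append.mp hp with hp' | hp'
            · obtain ⟨c, hc, h1, h2⟩ := hcover p hp'
              by_cases hceq : c = cu
              · subst hceq
                exact ⟨(true, c.2), by simp, h1, h2⟩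
              · have hcu' : u ∉ c.2 := fun hm => hceq (pvCompUnique hdisj hc hcuM hm hcuU)
                refine ⟨c, List.mem_cons_of_mem _ (List.mem_filter.mpr ⟨hc, ?_⟩), h1, h2⟩
                simpa [List.contains_iff_mem] using hcu'
            · simp only [List.mem_singleton] at hp'
              subst hp'
              exact ⟨(true, cu.2), by simp, hcuU, hsame⟩
          · intro c hc x hx y hy
            rcases List.mem_cons.mp hc with rfl | hc'
            · exact pvRch_mono _ (hconn cu hcuM x hx y hy)
            · exact pvRch_mono _ (hconn c (hsurv c hc').1 x hx y hy)
          · intro c hc hflag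
            rcases List.mem_cons.mp hc with rfl | hc'
            · simp at hflag
            · rw [hcntApp]
              rw [if_neg ((hsurv c hc').2)]
              simpa using hcnt c (hsurv c hc').1 hflag
        · -- genuine merge of two distinct components
          have hcune : cu ≠ cv := fun h => hsame (h ▸ hcvV)
          have hdisjUV : ∀ x, x ∈ cu.2 → x ∉ cv.2 :=
            pvDisjAll hdisj cu hcuM cv hcvM hcune
          have hred : pvUF ((u, v) :: es) comps =
              pvUF es ((cu.1 || cv.1, cu.2 ++ cv.2) ::
                comps.filter (fun c => !(c.2.contains u) && !(c.2.contains v))) := by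
            simp [pvUF, hFu, hFv, List.contains_iff_mem, hsame]
          rw [hred]
          apply ih
          have hsurv : ∀ c ∈ comps.filter (fun c => !(c.2.contains u) && !(c.2.contains v)),
              c ∈ comps ∧ u ∉ c.2 ∧ v ∉ c.2 := by
            intro c hc
            have h' := List.mem_filter.mp hc
            refine ⟨h'.1, ?_, ?_⟩
            · have := h'.2
              simp only [Bool.and_eq_true, Bool.not_eq_true', List.contains_iff_mem] at this
              simpa using this.1
            · have := h'.2
              simp only [Bool.and_eq_true, Bool.not_eq_true', List.contains_iff_mem] at this
              simpa using this.2
          refine ⟨?_, ?_, ?_, ?_, ?_, ?_⟩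
          · intro c hc
            rcases List.mem_cons.mp hc with rfl | hc'
            · have := hne cu hcuM
              simp only [ne_eq, List.append_eq_nil_iff]
              tauto
            · exact hne c (hsurv c hc').1
          · intro c hc
            rcases List.mem_cons.mp hc with rfl | hc'
            · exact (hnd cu hcuM).append (hnd cv hcvM) hdisjUV
            · exact hnd c (hsurv c hc').1
          · refine List.Pairwise.cons ?_
              (List.Pairwise.sublist List.filter_sublist hdisj)
            intro c' hc' x hx
            obtain ⟨hc'M, hc'u, hc'v⟩ := hsurv c' hc'
            rcases List.mem_append.mp hx with hxcu | hxcv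
            · exact pvDisjAll hdisj cu hcuM c' hc'M (fun h => hc'u (h ▸ hcuU)) x hxcu
            · exact pvDisjAll hdisj cv hcvM c' hc'M (fun h => hc'v (h ▸ hcvV)) x hxcv
          · intro p hp
            rcases List.mem_append.mp hp with hp' | hp'
            · obtain ⟨c, hc, h1, h2⟩ := hcover p hp'
              by_cases hceq : c = cu
              · subst hceq
                exact ⟨(c.1 || cv.1, c.2 ++ cv.2), by simp,
                  List.mem_append_left _ h1, List.mem_append_left _ h2⟩
              · by_cases hceq' : c = cv
                · subst hceq'
                  exact ⟨(cu.1 || c.1, cu.2 ++ c.2), by simp,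
                    List.mem_append_right _ h1, List.mem_append_right _ h2⟩
                · have hcu' : u ∉ c.2 := fun hm => hceq (pvCompUnique hdisj hc hcuM hm hcuU)
                  have hcv' : v ∉ c.2 := fun hm => hceq' (pvCompUnique hdisj hc hcvM hm hcvV)
                  refine ⟨c, List.mem_cons_of_mem _ (List.mem_filter.mpr ⟨hc, ?_⟩), h1, h2⟩
                  simp only [Bool.and_eq_true, Bool.not_eq_true', List.contains_iff_mem]
                  constructor
                  · simpa using hcu'
                  · simpa using hcv'
            · simp only [List.mem_singleton] at hp'
              subst hp'
              exact ⟨(cu.1 || cv.1, cu.2 ++ cv.2), by simp,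
                List.mem_append_left _ hcuU, List.mem_append_right _ hcvV⟩
          · intro c hc x hx y hy
            rcases List.mem_cons.mp hc with rfl | hc'
            · exact pvConnUnion hcuU hcvV (hconn cu hcuM) (hconn cv hcvM) hlast x hx y hy
            · exact pvRch_mono _ (hconn c (hsurv c hc').1 x hx y hy)
          · intro c hc hflag
            rcases List.mem_cons.mp hc with rfl | hc'
            · simp only [Bool.or_eq_false_iff] at hflag
              rw [hcntApp]
              rw [pvCountPSplit pr cu.2 cv.2 hdisjUV,
                if_pos (List.mem_append_left _ hcuU)]
              have h1 := hcnt cu hcuM hflag.1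
              have h2 := hcnt cv hcvM hflag.2
              simp only [List.length_append]
              omega
            · rw [hcntApp]
              rw [if_neg ((hsurv c hc').2.1)]
              simpa using hcnt c (hsurv c hc').1 hflag

-- ---- indexing helpers ----
lemma pvGet_int {α : Type} (xs : List α) (j : Int) (h0 : 0 ≤ j) (hj : j < xs.length) :
    PySem.List.pyGet? xs j = xs[j.toNat]? := by
  simp [PySem.List.pyGet?, PySem.List.pyIdx?, h0, hj]

lemma pvSet_int {α : Type} (xs : List α) (i : Int) (v : α) (h0 : 0 ≤ i) (hi : i < xs.length) :
    PySem.List.pySet? xs i v = some (xs.set i.toNat v) := by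
  simp [PySem.List.pySet?, PySem.List.pyIdx?, h0, hi]

-- ---- adjacency dictionary ----
lemma pvGraphA_getD (edges : List (Int × Int)) (x : Int) :
    (pvGraphA edges).getD x [] =
      edges.flatMap (fun p =>
        (if p.1 = x then [p.2] else []) ++ (if p.2 = x then [p.1] else [])) := by
  have main : ∀ (es : List (Int × Int)) (d : PySem.Dict Int (List Int)),
      (es.foldl (fun g p => (g.modify p.1 [] (· ++ [p.2])).modify p.2 [] (· ++ [p.1])) d).getD x []
        = d.getD x [] ++ es.flatMap (fun p =>
            (if p.1 = x then [p.2] else []) ++ (if p.2 = x then [p.1] else [])) := by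
    intro es
    induction es with
    | nil => simp
    | cons e t ih =>
      intro d
      simp only [List.foldl_cons, List.flatMap_cons, ih]
      rw [PySem.Dict.getD_modify, PySem.Dict.getD_modify]
      by_cases h1 : x = e.1
      · subst h1
        by_cases h2 : e.1 = e.2
        · simp [h2, List.append_assoc]
        · have h2' : ¬ e.2 = e.1 := fun h => h2 h.symm
          simp [h2, h2', List.append_assoc]
      · by_cases h2 : x = e.2
        · subst h2
          have h1' : ¬ e.1 = e.2 := fun h => h1 h.symm
          simp [h1, h1', List.append_assoc]
        · have h1' : ¬ e.1 = x := fun h => h1 h.symm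
          have h2' : ¬ e.2 = x := fun h => h2 h.symm
          simp [PySem.Dict.getD_modify, h1, h2, h1', h2']
  unfold pvGraphA
  rw [main]
  simp [PySem.Dict.getD_empty]

lemma pvGraphA_mem (edges : List (Int × Int)) (x y : Int) :
    y ∈ (pvGraphA edges).getD x [] ↔ pvEdgeR edges x y := by
  rw [pvGraphA_getD]
  simp only [List.mem_flatMap, pvEdgeR]
  constructor
  · rintro ⟨p, hp, hmem⟩
    rcases List.mem_append.mp hmem with h | h <;> split_ifs at h with hc <;>
      simp at h <;> subst h
    · left; rw [← hc]; exact hp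
    · right; rw [← hc]; exact hp
  · rintro (h | h)
    · exact ⟨(x, y), h, by simp⟩
    · exact ⟨(y, x), h, by simp⟩

-- ---- derived tree facts ----
lemma pvEdgeR_symm {edges : List (Int × Int)} {x y : Int} (h : pvEdgeR edges x y) :
    pvEdgeR edges y x := h.symm

lemma pvPar_root {edges : List (Int × Int)} {K : List Int} {Dp : Int → Nat}
    (ht : PvTree edges K Dp) (p : Int) : ¬ pvPar edges Dp 1 p := by
  rintro ⟨_, h⟩
  rw [ht.d1] at h
  omega

lemma pvEdge_charK {edges : List (Int × Int)} {K : List Int} {Dp : Int → Nat}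
    (ht : PvTree edges K Dp) {x y : Int} (hx : x ∈ K) (h : pvEdgeR edges x y) :
    y ∈ K ∧ (pvPar edges Dp x y ∨ pvPar edges Dp y x) := by
  rcases h with hm | hm
  · obtain ⟨h1, h2, h3⟩ := ht.edgeK (x, y) hm (Or.inl hx)
    refine ⟨h2, ?_⟩
    rcases h3 with h | h
    · exact Or.inl ⟨Or.inl hm, h⟩
    · exact Or.inr ⟨Or.inr hm, h⟩
  · obtain ⟨h1, h2, h3⟩ := ht.edgeK (y, x) hm (Or.inr hx)
    refine ⟨h1, ?_⟩
    rcases h3 with h | h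
    · exact Or.inr ⟨Or.inl hm, h⟩
    · exact Or.inl ⟨Or.inr hm, h⟩

-- ---- BFS invariant ----
def pvQn (q : List (Int × Int)) : List Int := q.map (·.1)

def pvInv (edges : List (Int × Int)) (K : List Int) (Dp : Int → Nat)
    (q : List (Int × Int)) (vis : List Bool) (md : Int) (Vl : List Int) : Prop :=
  vis.length = edges.length + 2 ∧
  Vl.Nodup ∧ (∀ x ∈ Vl, x ∈ K) ∧
  (∀ x ∈ K, PySem.List.pyGet? vis x = some (decide (x ∈ Vl))) ∧
  (∀ e ∈ q, e.1 ∈ K ∧ e.2 = (Dp e.1 : Int) ∧ e.1 ∉ Vl) ∧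
  (pvQn q).Nodup ∧
  (∀ x ∈ K, (x ∈ Vl ∨ x ∈ pvQn q) ↔ (x = 1 ∨ ∃ p, pvPar edges Dp x p ∧ p ∈ Vl)) ∧
  (∀ x ∈ Vl, (Dp x : Int) ≤ md) ∧
  (md = 0 ∨ ∃ x ∈ Vl, md = (Dp x : Int)) ∧ 0 ≤ md

def pvMeas (K : List Int) (q : List (Int × Int)) (Vl : List Int) : Nat :=
  q.length + 2 * ((K.filter
    (fun z => !(decide (z ∈ Vl) || decide (z ∈ pvQn q)))).length)

lemma pvEnqueueA_run (vis : List Bool) (d1 : Int) (Vl : List Int) (K : List Int) :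
    ∀ ys q, (∀ y ∈ ys, y ∈ K) →
    (∀ y ∈ K, PySem.List.pyGet? vis y = some (decide (y ∈ Vl))) →
    pvEnqueueA vis d1 ys q =
      some (q ++ (ys.filter (fun y => !decide (y ∈ Vl))).map (fun y => (y, d1))) := by
  intro ys
  induction ys with
  | nil => intro q _ _; simp [pvEnqueueA]
  | cons y t ih =>
    intro q hmem hvis
    have hy := hvis y (hmem y (by simp))
    simp only [pvEnqueueA, hy]
    by_cases hin : y ∈ Vl
    · simp only [hin, decide_true, if_true]
      rw [ih q (fun z hz => hmem z (by simp [hz])) hvis]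
      simp [hin]
    · simp only [hin, decide_false, Bool.false_eq_true, if_false]
      rw [ih (q ++ [(y, d1)]) (fun z hz => hmem z (by simp [hz])) hvis]
      simp [hin]

lemma pvStep {edges : List (Int × Int)} {K : List Int} {Dp : Int → Nat}
    (ht : PvTree edges K Dp)
    {q q' : List (Int × Int)} {vis : List Bool} {dep : List Int} {md : Int} {Vl : List Int}
    {x d : Int} (hq : q = (x, d) :: q') (hdep : dep.length = edges.length + 2)
    (hinv : pvInv edges K Dp q vis md Vl) (fuel : Nat) :
    ∃ q'' vis' dep',
      pvBfsA (pvGraphA edges) (fuel+1) q vis dep md =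
        pvBfsA (pvGraphA edges) fuel q'' vis' dep' (max md d) ∧
      dep'.length = edges.length + 2 ∧
      pvInv edges K Dp q'' vis' (max md d) (Vl ++ [x]) ∧
      pvMeas K q'' (Vl ++ [x]) < pvMeas K q Vl := by
  obtain ⟨hvl, hndV, hVk, hvis, hqe, hqnd, hclos, hbound, hatt, hmd0⟩ := hinv
  subst hq
  obtain ⟨hxK, hdeq, hxnV⟩ := hqe (x, d) (by simp)
  dsimp only at hdeq
  obtain ⟨hbx1, hbx2⟩ := ht.bnd x hxK
  have hxQ' : x ∉ pvQn q' := by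
    have := hqnd
    simp only [pvQn, List.map_cons, List.nodup_cons] at this
    exact this.1
  have hqnd' : (pvQn q').Nodup := by
    have := hqnd
    simp only [pvQn, List.map_cons, List.nodup_cons] at this
    exact this.2
  have hset : PySem.List.pySet? vis x true = some (vis.set x.toNat true) :=
    pvSet_int _ _ _ (by omega) (by rw [hvl]; push_cast; omega)
  have hset2 : PySem.List.pySet? dep x d = some (dep.set x.toNat d) :=
    pvSet_int _ _ _ (by omega) (by rw [hdep]; push_cast; omega)
  set vis' := vis.set x.toNat true with hvis'def
  set Vl' := Vl ++ [x] with hVl'def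
  have hvisn : ∀ y ∈ K, PySem.List.pyGet? vis' y = some (decide (y ∈ Vl')) := by
    intro y hy
    obtain ⟨hy1, hy2⟩ := ht.bnd y hy
    rw [pvGet_int _ y (by omega) (by simp only [hvis'def, List.length_set]; rw [hvl]; push_cast; omega)]
    rw [hvis'def, List.getElem?_set]
    by_cases hxy : y = x
    · subst hxy
      rw [if_pos rfl, if_pos (by rw [hvl]; omega)]
      have : y ∈ Vl' := by simp [hVl'def]
      simp [this]
    · rw [if_neg (fun h : x.toNat = y.toNat => hxy (by omega))]
      have hold := hvis y hy
      rw [pvGet_int _ y (by omega) (by rw [hvl]; push_cast; omega)] at hold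
      rw [hold]
      have : (y ∈ Vl') ↔ (y ∈ Vl) := by simp [hVl'def, hxy]
      simp [this]
  set ys := (pvGraphA edges).getD x [] with hysdef
  have hysK : ∀ y ∈ ys, y ∈ K := fun y hy =>
    (pvEdge_charK ht hxK ((pvGraphA_mem edges x y).mp hy)).1
  have henq := pvEnqueueA_run vis' (d + 1) Vl' K ys q' hysK hvisn
  set newN := ys.filter (fun y => !decide (y ∈ Vl')) with hnewNdef
  set new := newN.map (fun y => (y, d + 1)) with hnewdef
  have hchild : ∀ y ∈ newN, pvPar edges Dp y x ∧ y ∉ Vl ∧ y ∉ pvQn ((x, d) :: q') := by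
    intro y hy
    have hyys : y ∈ ys ∧ ¬ y ∈ Vl' := by
      rw [hnewNdef] at hy
      simpa [List.mem_filter] using hy
    have hedge : pvEdgeR edges x y := (pvGraphA_mem edges x y).mp hyys.1
    have hynVl : y ∉ Vl := fun h => hyys.2 (by simp [hVl'def, h])
    have hyK : y ∈ K := hysK y hyys.1
    have hPar : pvPar edges Dp y x := by
      rcases (pvEdge_charK ht hxK hedge).2 with hxy | hyx
      · exfalso
        have hx' := (hclos x hxK).mp (Or.inr (by simp [pvQn]))
        rcases hx' with hx1 | ⟨p, hp, hpV⟩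
        · exact pvPar_root ht y (hx1 ▸ hxy)
        · have hyp : y = p :=
            ht.par_un x hxK y p (pvEdgeR_symm hxy.1) (pvEdgeR_symm hp.1) hxy.2 hp.2
          exact hyys.2 (by simp [hVl'def, hyp ▸ hpV])
      · exact hyx
    have hynQ : y ∉ pvQn ((x, d) :: q') := by
      intro hyQ
      rcases (hclos y hyK).mp (Or.inr hyQ) with hy1 | ⟨p, hp, hpV⟩
      · exact pvPar_root ht x (hy1 ▸ hPar)
      · have hpx : x = p :=
          ht.par_un y hyK x p (pvEdgeR_symm hPar.1) (pvEdgeR_symm hp.1) hPar.2 hp.2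
        exact hxnV (hpx ▸ hpV)
    exact ⟨hPar, hynVl, hynQ⟩
  have heq : pvBfsA (pvGraphA edges) (fuel + 1) ((x, d) :: q') vis dep md
      = pvBfsA (pvGraphA edges) fuel (q' ++ new) vis' (dep.set x.toNat d) (max md d) := by
    show (match PySem.List.pySet? vis x true with
      | none => none
      | some vis' =>
        match PySem.List.pySet? dep x d with
        | none => none
        | some dep' =>
          match pvEnqueueA vis' (d + 1) ((pvGraphA edges).getD x []) q' with
          | none => none
          | some q'' => pvBfsA (pvGraphA edges) fuel q'' vis' dep' (max md d)) = _
    rw [hset, hset2]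
    show (match pvEnqueueA vis' (d + 1) ys q' with
      | none => none
      | some q'' => pvBfsA (pvGraphA edges) fuel q'' vis' (dep.set x.toNat d) (max md d)) = _
    rw [henq]
  have hQn'' : pvQn (q' ++ new) = pvQn q' ++ newN := by
    rw [hnewdef]
    simp only [pvQn, List.map_append, List.map_map]
    congr 1
    exact List.map_id'' (congrFun rfl) _
  have hiff : ∀ z, (z ∈ Vl' ∨ z ∈ pvQn (q' ++ new))
      ↔ ((z ∈ Vl ∨ z ∈ pvQn ((x, d) :: q')) ∨ z ∈ newN) := by
    intro z
    rw [hQn'']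
    simp only [hVl'def, List.mem_append, pvQn, List.map_cons,
      List.mem_cons]
    tauto
  refine ⟨q' ++ new, vis', dep.set x.toNat d, heq, by simp [hdep], ?_, ?_⟩
  · refine ⟨by simp [hvis'def, hvl], ?_, ?_, hvisn, ?_, ?_, ?_, ?_, ?_, ?_⟩
    · exact hndV.append (List.nodup_singleton _)
        (by simpa [List.disjoint_singleton] using hxnV)
    · intro z hz
      rcases List.mem_append.mp hz with h | h
      · exact hVk z h
      · simp only [List.mem_singleton] at h
        exact h ▸ hxK
    · intro e he
      rcases List.mem_append.mp he with h | h
      · obtain ⟨h1, h2, h3⟩ := hqe e (List.mem_cons_of_mem _ h)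
        refine ⟨h1, h2, ?_⟩
        intro hmem
        rcases List.mem_append.mp hmem with hm | hm
        · exact h3 hm
        · simp only [List.mem_singleton] at hm
          exact hxQ' (hm ▸ List.mem_map.mpr ⟨e, h, rfl⟩)
      · rw [hnewdef] at h
        obtain ⟨y, hy, rfl⟩ := List.mem_map.mp h
        obtain ⟨hPar, _, _⟩ := hchild y hy
        have hyVl' : y ∉ Vl' := by
          rw [hnewNdef] at hy
          simpa [List.mem_filter] using (List.mem_filter.mp hy).2
        refine ⟨hysK y (List.mem_of_mem_filter hy), ?_, hyVl'⟩
        dsimp only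
        rw [hdeq, hPar.2]
        push_cast
        ring
    · rw [hQn'']
      refine hqnd'.append ((ht.adj_nd x hxK).filter _) ?_
      intro z hz1 hz2
      exact (hchild z hz2).2.2 (List.mem_cons_of_mem _ hz1)
    · intro z hzK
      rw [hiff z]
      constructor
      · rintro (hold | hnew)
        · rcases (hclos z hzK).mp hold with h1 | ⟨p, hp, hpV⟩
          · exact Or.inl h1
          · exact Or.inr ⟨p, hp, by simp [hVl'def, hpV]⟩
        · obtain ⟨hPar, _, _⟩ := hchild z hnew
          exact Or.inr ⟨x, hPar, by simp [hVl'def]⟩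
      · rintro (h1 | ⟨p, hp, hpV⟩)
        · exact Or.inl ((hclos z hzK).mpr (Or.inl h1))
        · rcases List.mem_append.mp hpV with hpVl | hpx
          · exact Or.inl ((hclos z hzK).mpr (Or.inr ⟨p, hp, hpVl⟩))
          · simp only [List.mem_singleton] at hpx
            subst hpx
            have hzys : z ∈ ys := (pvGraphA_mem edges p z).mpr (pvEdgeR_symm hp.1)
            by_cases hzV : z ∈ Vl'
            · rw [hVl'def] at hzV
              rcases List.mem_append.mp hzV with hzVl | hzx
              · exact Or.inl (Or.inl hzVl)
              · simp only [List.mem_singleton] at hzx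
                subst hzx
                exact Or.inl (Or.inr List.mem_cons_self)
            · exact Or.inr (List.mem_filter.mpr ⟨hzys, by simpa using hzV⟩)
    · intro z hz
      rcases List.mem_append.mp hz with h | h
      · exact le_trans (hbound z h) (le_max_left _ _)
      · simp only [List.mem_singleton] at h
        subst h
        rw [← hdeq]
        exact le_max_right _ _
    · rcases le_total d md with h | h
      · rw [max_eq_left h]
        rcases hatt with h0 | ⟨z, hzV, hze⟩
        · exact Or.inl h0
        · exact Or.inr ⟨z, List.mem_append_left _ hzV, hze⟩
      · rw [max_eq_right h]
        exact Or.inr ⟨x, by simp [hVl'def], hdeq⟩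
    · exact le_trans hmd0 (le_max_left _ _)
  · -- measure decreases
    have hP' : ∀ z, (!(decide (z ∈ Vl') || decide (z ∈ pvQn (q' ++ new))))
        = ((!(decide (z ∈ Vl) || decide (z ∈ pvQn ((x, d) :: q')))) && !decide (z ∈ newN)) := by
      intro z
      have h1 := hiff z
      by_cases ha : z ∈ Vl' ∨ z ∈ pvQn (q' ++ new)
      · have hb := h1.mp ha
        rcases ha with ha | ha <;> rcases hb with (hb | hb) | hb <;>
          simp [ha, hb]
      · push_neg at ha
        have hb : ¬ ((z ∈ Vl ∨ z ∈ pvQn ((x, d) :: q')) ∨ z ∈ newN) := fun h => by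
          rcases h1.mpr h with h2 | h2
          · exact ha.1 h2
          · exact ha.2 h2
        push_neg at hb
        simp [ha.1, ha.2, hb.1.1, hb.1.2, hb.2]
    have hfilter : (K.filter (fun z => !(decide (z ∈ Vl') || decide (z ∈ pvQn (q' ++ new)))))
        = ((K.filter (fun z => !(decide (z ∈ Vl) || decide (z ∈ pvQn ((x, d) :: q'))))).filter
            (fun z => !decide (z ∈ newN))) := by
      rw [List.filter_filter]
      apply List.filter_congr
      intro z _
      rw [hP' z]
      rw [Bool.and_comm]
    set U := K.filter (fun z => !(decide (z ∈ Vl) || decide (z ∈ pvQn ((x, d) :: q'))))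
      with hUdef
    have hUnd : U.Nodup := ht.ndK.filter _
    have hnewnd : newN.Nodup := (ht.adj_nd x hxK).filter _
    have hsubnew : ∀ y ∈ newN, y ∈ U := by
      intro y hy
      obtain ⟨hPar, hyV, hyQ⟩ := hchild y hy
      refine List.mem_filter.mpr ⟨hysK y (List.mem_of_mem_filter hy), ?_⟩
      simp [hyV, hyQ]
    have hinner : (U.filter (fun z => decide (z ∈ newN))).length = newN.length := by
      apply Nat.le_antisymm
      · exact (List.subperm_of_subset (hUnd.filter _)
          (fun z hz => by simpa using (List.mem_filter.mp hz).2)).length_le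
      · exact (List.subperm_of_subset hnewnd
          (fun z hz => List.mem_filter.mpr ⟨hsubnew z hz, by simpa using hz⟩)).length_le
    have hsplit := List.length_eq_length_filter_add (l := U) (fun z => decide (z ∈ newN))
    unfold pvMeas
    rw [hfilter, ← hUdef]
    have hlen'' : (q' ++ new).length = q'.length + newN.length := by
      simp [hnewdef]
    rw [hlen'']
    simp only [List.length_cons]
    omega

lemma pvFinal {edges : List (Int × Int)} {K : List Int} {Dp : Int → Nat}
    (ht : PvTree edges K Dp) {vis : List Bool} {md : Int}
    {Vl : List Int} (hinv : pvInv edges K Dp [] vis md Vl) : md = pvMaxD K Dp := by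
  obtain ⟨hvl, hndV, hVk, hvis, hq, hqnd, hclos, hbound, hatt, hmd0⟩ := hinv
  have hall : ∀ x ∈ K, x ∈ Vl := by
    have H : ∀ k : Nat, ∀ x ∈ K, Dp x = k → x ∈ Vl := by
      intro k
      induction k using Nat.strong_induction_on with
      | _ k ihk =>
        intro x hx hdx
        have hcl := (hclos x hx).mpr
        by_cases hx1 : x = 1
        · rcases hcl (Or.inl hx1) with h | h
          · exact h
          · simp [pvQn] at h
        · obtain ⟨p, hpK, hadj, hdp⟩ := ht.par_ex x hx hx1
          have hdplt : Dp p < k := by omega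
          have hpV : p ∈ Vl := ihk _ hdplt p hpK rfl
          rcases hcl (Or.inr ⟨p, ⟨pvEdgeR_symm hadj, hdp⟩, hpV⟩) with h | h
          · exact h
          · simp [pvQn] at h
    exact fun x hx => H (Dp x) x hx rfl
  have hfold := PySem.List.le_foldl_max_int K (fun x => (Dp x : Int)) 0
  have hMD : pvMaxD K Dp
      = K.foldl (fun acc y => max acc ((Dp y : Int))) 0 := by
    unfold pvMaxD
    rw [List.foldl_map]
  apply le_antisymm
  · rcases hatt with rfl | ⟨x, hxV, rfl⟩
    · rw [hMD]
      exact hfold.1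
    · rw [hMD]
      exact hfold.2 x (hVk x hxV)
  · have hmem := PySem.List.foldl_max_mem (K.map (fun x => (Dp x : Int))) 0
    rcases hmem with h0 | hm
    · unfold pvMaxD
      rw [h0]
      exact hmd0
    · obtain ⟨x, hxK, hxe⟩ := List.mem_map.mp hm
      unfold pvMaxD
      rw [← hxe]
      exact hbound x (hall x hxK)

lemma pvRun {edges : List (Int × Int)} {K : List Int} {Dp : Int → Nat}
    (ht : PvTree edges K Dp) :
    ∀ (fuel : Nat) (q : List (Int × Int)) (vis : List Bool) (dep : List Int) (md : Int)
      (Vl : List Int), pvInv edges K Dp q vis md Vl → dep.length = edges.length + 2 →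
      pvMeas K q Vl ≤ fuel →
      pvBfsA (pvGraphA edges) fuel q vis dep md = some (pvMaxD K Dp) := by
  intro fuel
  induction fuel with
  | zero =>
    intro q vis dep md Vl hinv hdep hm
    have hq : q = [] := by
      cases q with
      | nil => rfl
      | cons e t =>
        exfalso
        unfold pvMeas at hm
        simp at hm
    subst hq
    rw [show pvBfsA (pvGraphA edges) 0 [] vis dep md = some md from rfl]
    rw [pvFinal ht hinv]
  | succ f ih =>
    intro q vis dep md Vl hinv hdep hm
    cases q with
    | nil =>
      rw [show pvBfsA (pvGraphA edges) (f + 1) [] vis dep md = some md from rfl]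
      rw [pvFinal ht hinv]
    | cons e q' =>
      rcases e with ⟨x, d⟩
      obtain ⟨q'', vis', dep', heq, hdep', hinv', hlt⟩ := pvStep ht rfl hdep hinv f
      rw [heq]
      exact ih q'' vis' dep' (max md d) _ hinv' hdep' (by omega)

-- A's port computes the answer determined by (K, Dp)
lemma pvA_eval {edges : List (Int × Int)} {K : List Int} {Dp : Int → Nat}
    (ht : PvTree edges K Dp) :
    assignEdgeWeights edges =
      (if pvMaxD K Dp = 0 then 0
       else PySem.Int.powMod 2 ((pvMaxD K Dp) - 1).toNat (10 ^ 9 + 7)) := by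
  have hinv0 : pvInv edges K Dp [(1, 0)] (List.replicate (edges.length + 1 + 1) false) 0 [] := by
    refine ⟨by simp, by simp, by simp, ?_, ?_, by simp [pvQn], ?_, by simp, Or.inl rfl, le_refl 0⟩
    · intro x hx
      obtain ⟨h1, h2⟩ := ht.bnd x hx
      rw [pvGet_int _ x (by omega) (by simp; omega)]
      rw [List.getElem?_replicate_of_lt (by omega)]
      simp
    · intro e he
      simp only [List.mem_singleton] at he
      subst he
      refine ⟨ht.oneK, ?_, by simp⟩
      rw [ht.d1]
      simp
    · intro z hz
      simp only [List.mem_nil_iff, false_or, pvQn, List.map_cons, List.map_nil,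
        List.mem_singleton]
      constructor
      · intro h1
        exact Or.inl h1
      · intro h
        rcases h with h | ⟨p, _, hp⟩
        · exact h
        · simp at hp
  have hmeas0 : pvMeas K [(1, 0)] [] ≤ 2 * edges.length + 4 := by
    unfold pvMeas
    have hfl : ((K.filter
        (fun z => !(decide (z ∈ ([] : List Int)) || decide (z ∈ pvQn [(1, 0)])))).length)
        ≤ K.length := List.length_filter_le _ _
    have hKl := ht.klen
    simp only [List.length_cons, List.length_nil]
    omega
  unfold assignEdgeWeights
  dsimp only
  rw [pvRun ht (2 * edges.length + 4) [(1, 0)] _ _ 0 [] hinv0 (by simp) hmeas0]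

lemma pvAdjCountAux (x y : Int) (hxy : x ≠ y) :
    ∀ (es : List (Int × Int)),
    (es.flatMap (fun p =>
        (if p.1 = x then [p.2] else []) ++ (if p.2 = x then [p.1] else []))).count y
      = es.count (x, y) + es.count (y, x) := by
  intro es
  induction es with
  | nil => simp
  | cons p t ih =>
    rw [List.flatMap_cons, List.count_append, ih]
    rcases p with ⟨a, b⟩
    by_cases ha : a = x <;> by_cases hb : b = x <;>
      by_cases ha' : a = y <;> by_cases hb' : b = y <;>
      simp_all [List.count_cons, Prod.ext_iff] <;> omega

lemma pvAdjCount (x y : Int) (hxy : x ≠ y) (edges : List (Int × Int)) :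
    ((pvGraphA edges).getD x []).count y = edges.count (x, y) + edges.count (y, x) := by
  rw [pvGraphA_getD]
  exact pvAdjCountAux x y hxy edges

-- the ghost construction: Pre_ yields the tree facts
lemma pvGhost (edges : List (Int × Int)) (hpre : Pre_assignEdgeWeights edges) :
    ∃ K Dp, PvTree edges K Dp := by
  have hInv : PvUFInv edges (pvUF edges []) := by
    have h0 : PvUFInv [] [] :=
      ⟨by simp, by simp, by simp, by simp, by simp, by simp⟩
    simpa using pvUF_run edges [] [] h0
  obtain ⟨hne, hnd, hdisj, hcover, hconn, hcnt⟩ := hInv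
  have hlen0 : (0 : Int) ≤ (edges.length : Int) := Int.natCast_nonneg _
  by_cases hex : ∃ c ∈ pvUF edges [], 1 ∈ c.2
  · -- node 1 lies in a component c; K := c.2
    obtain ⟨c, hcM, hc1⟩ := hex
    obtain ⟨hflag, hbnd⟩ := hpre c hcM hc1
    have hKnd : c.2.Nodup := hnd c hcM
    have hKR : ∀ x ∈ c.2, ∃ k, pvWk edges x k :=
      fun x hx => pvRch_to_wk (hconn c hcM 1 hc1 x hx)
    have hRK : ∀ {x : Int}, (∃ k, pvWk edges x k) → x ∈ c.2 := by
      intro x hx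
      obtain ⟨k, hw⟩ := hx
      induction hw with
      | root => exact hc1
      | step hu hadj ihw =>
        rcases hadj with hm | hm
        · obtain ⟨c0, hc0, h1, h2⟩ := hcover _ hm
          have hceq : c0 = c := pvCompUnique hdisj hc0 hcM h1 ihw
          exact hceq ▸ h2
        · obtain ⟨c0, hc0, h1, h2⟩ := hcover _ hm
          have hceq : c0 = c := pvCompUnique hdisj hc0 hcM h2 ihw
          exact hceq ▸ h1
    have hclosK : ∀ p ∈ edges, (p.1 ∈ c.2 ∨ p.2 ∈ c.2) → p.1 ∈ c.2 ∧ p.2 ∈ c.2 := by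
      intro p hp h
      obtain ⟨c0, hc0, h1, h2⟩ := hcover p hp
      rcases h with h | h
      · have hceq : c0 = c := pvCompUnique hdisj hc0 hcM h1 h
        exact ⟨h, hceq ▸ h2⟩
      · have hceq : c0 = c := pvCompUnique hdisj hc0 hcM h2 h
        exact ⟨hceq ▸ h1, h⟩
    -- the incident-edge list and the non-root vertex list
    set L := edges.filter (fun p => decide (p.1 ∈ c.2)) with hLdef
    set V := c.2.filter (fun v => decide (v ≠ 1)) with hVdef
    have hLlen : L.length + 1 = c.2.length := by
      have := hcnt c hcM hflag
      rwa [List.countP_eq_length_filter] at this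
    have hVlen : V.length + 1 = c.2.length := by
      have hsplit := List.length_eq_length_filter_add (l := c.2) (fun v => decide (v ≠ 1))
      have hcompl : (c.2.filter (fun v => !decide (v ≠ 1))).length = 1 := by
        have hc2 : c.2.filter (fun v => !decide (v ≠ 1)) = c.2.filter (fun v => v == 1) := by
          apply List.filter_congr
          intro v _
          by_cases hv : v = 1 <;> simp [hv]
        rw [hc2, ← List.countP_eq_length_filter]
        show c.2.count 1 = 1
        exact List.count_eq_one_of_mem hKnd hc1
      have hVl : V.length = (c.2.filter (fun v => decide (v ≠ 1))).length := by rw [hVdef]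
      omega
    have hVmem : ∀ v, v ∈ V ↔ (v ∈ c.2 ∧ v ≠ 1) := by
      intro v
      rw [hVdef, List.mem_filter]
      simp
    -- "edge p serves vertex v": p joins v to a neighbour one level up
    set f : (Int × Int) → Int → Bool := fun p v =>
      @decide ((p.1 = v ∧ pvDp edges p.2 + 1 = pvDp edges v) ∨
               (p.2 = v ∧ pvDp edges p.1 + 1 = pvDp edges v)) (Classical.propDecidable _)
      with hfdef
    have hfIff : ∀ p v, f p v = true ↔
        ((p.1 = v ∧ pvDp edges p.2 + 1 = pvDp edges v) ∨
         (p.2 = v ∧ pvDp edges p.1 + 1 = pvDp edges v)) := by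
      intro p v
      rw [hfdef]
      exact @decide_eq_true_iff _ (Classical.propDecidable _)
    have huniq : ∀ p v v', f p v = true → f p v' = true → v = v' := by
      intro p v v' h1 h2
      rw [hfIff] at h1 h2
      rcases h1 with ⟨e1, d1⟩ | ⟨e1, d1⟩ <;> rcases h2 with ⟨e2, d2⟩ | ⟨e2, d2⟩ <;>
        subst e1 <;> subst e2 <;> omega
    have hpar : ∀ v ∈ c.2, v ≠ 1 → ∃ u, u ∈ c.2 ∧ pvEdgeR edges u v ∧
        pvDp edges v = pvDp edges u + 1 := by
      intro v hv hv1
      have hRv := hKR v hv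
      have hDv0 : pvDp edges v ≠ 0 := fun h0 => hv1 (pvDp_zero hRv h0)
      obtain ⟨k, hk⟩ := Nat.exists_eq_succ_of_ne_zero hDv0
      obtain ⟨u, hadj, hRu, hDu⟩ := pvDp_succ_inv hRv hk
      exact ⟨u, hRK hRu, hadj, by omega⟩
    have hex1 : ∀ v ∈ V, ∃ p ∈ L, f p v = true := by
      intro v hvV
      obtain ⟨hv, hv1⟩ := (hVmem v).mp hvV
      obtain ⟨u, huK, hadj, hDv⟩ := hpar v hv hv1
      rcases hadj with hm | hm
      · refine ⟨(u, v), List.mem_filter.mpr ⟨hm, by simp [huK]⟩, ?_⟩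
        rw [hfIff]
        exact Or.inr ⟨rfl, by dsimp only; omega⟩
      · refine ⟨(v, u), List.mem_filter.mpr ⟨hm, by simp [hv]⟩, ?_⟩
        rw [hfIff]
        exact Or.inl ⟨rfl, by dsimp only; omega⟩
    have hVnd : V.Nodup := hKnd.filter _
    have hsum := pvSumCount f L V hVnd huniq
    have hge : ∀ v ∈ V, 1 ≤ L.countP (fun p => f p v) := by
      intro v hv
      obtain ⟨p, hp, hfp⟩ := hex1 v hv
      exact List.countP_pos_iff.mpr ⟨p, hp, hfp⟩
    have hsumge : V.length ≤ (V.map (fun v => L.countP (fun p => f p v))).sum :=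
      pvSumGeLen V _ hge
    have hcountPle : L.countP (fun p => decide (∃ v ∈ V, f p v = true)) ≤ L.length :=
      List.countP_le_length
    have hVL : V.length = L.length := by omega
    have hsumle : (V.map (fun v => L.countP (fun p => f p v))).sum ≤ V.length := by
      rw [hsum, hVL]
      exact hcountPle
    have hcnt1 : ∀ v ∈ V, L.countP (fun p => f p v) = 1 :=
      pvSumAllOne (fun v => L.countP (fun p => f p v)) V hge hsumle
    have hall : ∀ p ∈ L, ∃ v ∈ V, f p v = true := by
      have heq : L.countP (fun p => decide (∃ v ∈ V, f p v = true)) = L.length := by omega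
      intro p hp
      have := List.countP_eq_length.mp heq p hp
      exact of_decide_eq_true this
    have hΔ : ∀ p ∈ L, pvDp edges p.1 = pvDp edges p.2 + 1 ∨
        pvDp edges p.2 = pvDp edges p.1 + 1 := by
      intro p hp
      obtain ⟨v, _, hfv⟩ := hall p hp
      rw [hfIff] at hfv
      rcases hfv with ⟨e1, d1⟩ | ⟨e1, d1⟩
      · exact Or.inl (by rw [e1]; omega)
      · exact Or.inr (by rw [e1]; omega)
    have hnoself : ∀ z ∈ c.2, (z, z) ∉ edges := by
      intro z hz hm
      have hzL : (z, z) ∈ L := List.mem_filter.mpr ⟨hm, by simp [hz]⟩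
      obtain ⟨v, _, hfv⟩ := hall _ hzL
      rw [hfIff] at hfv
      rcases hfv with ⟨h1, h2⟩ | ⟨h1, h2⟩ <;> · dsimp only at h1 h2; rw [h1] at h2; omega
    have hmemL : ∀ p ∈ edges, p.1 ∈ c.2 → p ∈ L :=
      fun p hp h1 => List.mem_filter.mpr ⟨hp, by simp [h1]⟩
    refine ⟨c.2, pvDp edges, ?_, ?_, ?_, ?_, ?_, ?_, ?_, ?_, ?_, ?_⟩
    · exact hKnd
    · exact hc1
    · exact hbnd
    · exact pvDp_one edges
    · exact fun v hv h0 => pvDp_zero (hKR v hv) h0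
    · intro p hp h
      obtain ⟨h1, h2⟩ := hclosK p hp h
      exact ⟨h1, h2, hΔ p (hmemL p hp h1)⟩
    · exact hpar
    · -- uniqueness of the parent
      intro v hv p p' hadj hadj' hd hd'
      by_contra hne
      have hv1 : v ≠ 1 := by
        intro h1
        rw [h1, pvDp_one] at hd
        omega
      have hvV : v ∈ V := (hVmem v).mpr ⟨hv, hv1⟩
      have hpv : p ≠ v := by
        intro h
        rw [h] at hd
        omega
      have hp'v : p' ≠ v := by
        intro h
        rw [h] at hd'
        omega
      have hpK : p ∈ c.2 := by
        rcases hadj with hm | hm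
        · exact (hclosK _ hm (Or.inr hv)).1
        · exact (hclosK _ hm (Or.inl hv)).2
      have hp'K : p' ∈ c.2 := by
        rcases hadj' with hm | hm
        · exact (hclosK _ hm (Or.inr hv)).1
        · exact (hclosK _ hm (Or.inl hv)).2
      have hwit : ∀ q, q ∈ c.2 → q ≠ v → pvEdgeR edges q v → pvDp edges v = pvDp edges q + 1 →
          ∃ e, e ∈ L ∧ f e v = true ∧ (e = (q, v) ∨ e = (v, q)) := by
        intro q hqK hqv hadjq hdq
        rcases hadjq with hm | hm
        · exact ⟨(q, v), hmemL _ hm hqK, by rw [hfIff]; exact Or.inr ⟨rfl, by dsimp only; omega⟩,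
            Or.inl rfl⟩
        · exact ⟨(v, q), hmemL _ hm hv, by rw [hfIff]; exact Or.inl ⟨rfl, by dsimp only; omega⟩,
            Or.inr rfl⟩
      obtain ⟨e, heL, hfe, hee⟩ := hwit p hpK hpv hadj hd
      obtain ⟨e', he'L, hfe', he'e⟩ := hwit p' hp'K hp'v hadj' hd'
      have hneq : e ≠ e' := by
        rcases hee with rfl | rfl <;> rcases he'e with rfl | rfl <;> intro h <;>
          rw [Prod.mk.injEq] at h
        · exact hne h.1
        · exact hpv h.1
        · exact hpv h.2
        · exact hne h.2
      have h2le := pvTwoCountP (fun q => f q v) L e e' hneq heL he'L hfe hfe'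
      rw [hcnt1 v hvV] at h2le
      omega
    · -- adjacency lists are duplicate-free
      intro x hx
      rw [List.nodup_iff_count_le_one]
      intro y
      by_cases hxy : y = x
      · subst hxy
        have hnm : y ∉ (pvGraphA edges).getD y [] := by
          intro hm
          rcases (pvGraphA_mem edges y y).mp hm with h | h <;> exact hnoself y hx h
        simp [List.count_eq_zero_of_not_mem hnm]
      · by_contra hgt
        have h2 : 2 ≤ ((pvGraphA edges).getD x []).count y := by omega
        have hymem : y ∈ (pvGraphA edges).getD x [] := by
          by_contra hny
          rw [List.count_eq_zero_of_not_mem hny] at h2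
          omega
        have hadjxy : pvEdgeR edges x y := (pvGraphA_mem edges x y).mp hymem
        have hyK : y ∈ c.2 := by
          rcases hadjxy with hm | hm
          · exact (hclosK _ hm (Or.inl hx)).2
          · exact (hclosK _ hm (Or.inr hx)).1
        have hΔ' : pvDp edges x = pvDp edges y + 1 ∨ pvDp edges y = pvDp edges x + 1 := by
          rcases hadjxy with hm | hm
          · exact hΔ _ (hmemL _ hm hx)
          · rcases hΔ _ (hmemL _ hm hyK) with h | h
            · exact Or.inr h
            · exact Or.inl h
        have hcnteq := pvAdjCount x y (fun h => hxy h.symm) edges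
        have hLc1 : L.count (x, y) = edges.count (x, y) := by
          rw [hLdef]
          exact List.count_filter (by simp [hx])
        have hLc2 : L.count (y, x) = edges.count (y, x) := by
          rw [hLdef]
          exact List.count_filter (by simp [hyK])
        have hdistinct : ((x, y) : Int × Int) ≠ (y, x) := by
          intro h
          rw [Prod.mk.injEq] at h
          exact hxy h.1.symm
        have hkey : ∀ w, w ∈ V → f (x, y) w = true → f (y, x) w = true →
            2 ≤ L.countP (fun q => f q w) → False := by
          intro w hwV _ _ hge2
          rw [hcnt1 w hwV] at hge2
          omega
        have hcount2 : ∀ w, f (x, y) w = true → f (y, x) w = true → w ∈ V → False := by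
          intro w hf1 hf2 hwV
          apply hkey w hwV hf1 hf2
          have hc1 : L.count (x, y) + L.count (y, x) = ((pvGraphA edges).getD x []).count y := by
            rw [hLc1, hLc2, hcnteq]
          rcases Nat.lt_or_ge (L.count (x, y)) 2 with hlt1 | hge1
          · rcases Nat.lt_or_ge (L.count (y, x)) 2 with hlt2 | hge2
            · -- both counts ≤ 1, so both are 1: two distinct members
              have hm1 : (x, y) ∈ L := by
                by_contra hn
                rw [List.count_eq_zero_of_not_mem hn] at hc1
                omega
              have hm2 : (y, x) ∈ L := by
                by_contra hn
                rw [List.count_eq_zero_of_not_mem hn] at hc1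
                omega
              exact pvTwoCountP (fun q => f q w) L (x, y) (y, x) hdistinct hm1 hm2 hf1 hf2
            · calc 2 ≤ L.count (y, x) := hge2
                _ ≤ L.countP (fun q => f q w) := pvCountLe (fun q => f q w) L (y, x) hf2
          · calc 2 ≤ L.count (x, y) := hge1
              _ ≤ L.countP (fun q => f q w) := pvCountLe (fun q => f q w) L (x, y) hf1
        rcases hΔ' with hcase | hcase
        · have hx1 : x ≠ 1 := by
            intro h
            rw [h, pvDp_one] at hcase
            omega
          exact hcount2 x (by rw [hfIff]; exact Or.inl ⟨rfl, by dsimp only; omega⟩)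
            (by rw [hfIff]; exact Or.inr ⟨rfl, by dsimp only; omega⟩)
            ((hVmem x).mpr ⟨hx, hx1⟩)
        · have hy1 : y ≠ 1 := by
            intro h
            rw [h, pvDp_one] at hcase
            omega
          exact hcount2 y (by rw [hfIff]; exact Or.inr ⟨rfl, by dsimp only; omega⟩)
            (by rw [hfIff]; exact Or.inl ⟨rfl, by dsimp only; omega⟩)
            ((hVmem y).mpr ⟨hyK, hy1⟩)
    · -- |K| ≤ |edges| + 1
      have h1 := List.length_filter_le (fun p => decide (p.1 ∈ c.2)) edges
      have h2 : L.length = (edges.filter (fun p => decide (p.1 ∈ c.2))).length := by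
        rw [hLdef]
      omega
  · -- no component contains node 1: K = [1], depth identically 0
    have hno1 : ∀ p ∈ edges, p.1 ≠ 1 ∧ p.2 ≠ 1 := by
      intro p hp
      obtain ⟨c, hc, h1, h2⟩ := hcover p hp
      exact ⟨fun h => hex ⟨c, hc, h ▸ h1⟩, fun h => hex ⟨c, hc, h ▸ h2⟩⟩
    have hadj1 : (pvGraphA edges).getD 1 [] = [] := by
      rw [pvGraphA_getD]
      rw [List.flatMap_eq_nil_iff]
      intro p hp
      obtain ⟨h1, h2⟩ := hno1 p hp
      simp [h1, h2]
    refine ⟨[1], fun _ => 0, ?_, ?_, ?_, ?_, ?_, ?_, ?_, ?_, ?_, ?_⟩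
    · simp
    · simp
    · intro x hx
      simp only [List.mem_singleton] at hx
      subst hx
      omega
    · rfl
    · intro v hv _
      simpa using hv
    · intro p hp h
      rcases h with h | h <;> simp only [List.mem_singleton] at h
      · exact absurd h (hno1 p hp).1
      · exact absurd h (hno1 p hp).2
    · intro v hv hv1
      simp only [List.mem_singleton] at hv
      exact absurd hv hv1
    · intro v hv p p' hadj _ _ _
      simp only [List.mem_singleton] at hv
      subst hv
      rcases hadj with hm | hm
      · exact absurd rfl (hno1 _ hm).2
      · exact absurd rfl (hno1 _ hm).1
    · intro x hx
      simp only [List.mem_singleton] at hx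
      subst hx
      rw [hadj1]
      exact List.nodup_nil
    · simp only [List.length_singleton]
      omega

-- ---- B side: the relaxation invariant ----
def pvBInv (edges : List (Int × Int)) (K : List Int) (Dp : Int → Nat)
    (S : List Int) (d : PySem.Dict Int Int) : Prop :=
  S.Nodup ∧ 1 ∈ S ∧ (∀ v ∈ S, v ∈ K) ∧
  d.items = S.map (fun v => (v, (Dp v : Int))) ∧
  (∀ v ∈ S, v ≠ 1 → ∃ w, w ∈ S ∧ pvEdgeR edges w v ∧ Dp v = Dp w + 1)

lemma pvBInv_keys {edges : List (Int × Int)} {K : List Int} {Dp : Int → Nat}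
    {S : List Int} {d : PySem.Dict Int Int} (hinv : pvBInv edges K Dp S d) :
    d.keys = S := by
  obtain ⟨_, _, _, hit, _⟩ := hinv
  simp only [PySem.Dict.keys, hit, List.map_map]
  exact List.map_id'' (congrFun rfl) _

lemma pvBInv_contains {edges : List (Int × Int)} {K : List Int} {Dp : Int → Nat}
    {S : List Int} {d : PySem.Dict Int Int} (hinv : pvBInv edges K Dp S d) (z : Int) :
    d.contains z = decide (z ∈ S) := by
  rw [PySem.Dict.contains_eq_decide_mem_keys, pvBInv_keys hinv]

lemma pvBInv_getD {edges : List (Int × Int)} {K : List Int} {Dp : Int → Nat}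
    {S : List Int} {d : PySem.Dict Int Int} (hinv : pvBInv edges K Dp S d)
    {v : Int} (hv : v ∈ S) : d.getD v 0 = (Dp v : Int) := by
  have hnd : d.keys.Nodup := by rw [pvBInv_keys hinv]; exact hinv.1
  have hmem : (v, (Dp v : Int)) ∈ d.items := by
    rw [hinv.2.2.2.1]
    exact List.mem_map.mpr ⟨v, hv, rfl⟩
  exact PySem.Dict.getD_of_mem_items _ hmem hnd 0

lemma pvSweepStep {edges : List (Int × Int)} {K : List Int} {Dp : Int → Nat}
    (ht : PvTree edges K Dp) :
    ∀ (es : List (Int × Int)), (∀ p ∈ es, p ∈ edges) →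
    ∀ (d : PySem.Dict Int Int) (S : List Int) (ch : Bool), pvBInv edges K Dp S d →
    ∃ S' d' ch', pvSweepB es d ch = (d', ch') ∧ pvBInv edges K Dp S' d' ∧
      (∃ t, S' = S ++ t) ∧
      (ch' = ch ∨ (ch' = true ∧ S.length < S'.length)) ∧
      (ch' = false → (d' = d ∧ S' = S ∧ ∀ p ∈ es, (p.1 ∈ S ↔ p.2 ∈ S))) := by
  intro es
  induction es with
  | nil =>
    intro _ d S ch hinv
    exact ⟨S, d, ch, rfl, hinv, ⟨[], by simp⟩, Or.inl rfl,
      fun _ => ⟨rfl, rfl, by simp⟩⟩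
  | cons e es ih =>
    rcases e with ⟨u, v⟩
    intro hsub d S ch hinv
    have hmemE : (u, v) ∈ edges := hsub (u, v) (by simp)
    have hsub' : ∀ p ∈ es, p ∈ edges := fun p hp => hsub p (by simp [hp])
    have hcu := pvBInv_contains hinv u
    have hcv := pvBInv_contains hinv v
    obtain ⟨hnd, h1S, hSK, hit, hcl⟩ := hinv
    by_cases hu : u ∈ S <;> by_cases hv : v ∈ S
    · -- both present: skip
      have hred : pvSweepB ((u, v) :: es) d ch = pvSweepB es d ch := by
        simp [pvSweepB, hcu, hcv, hu, hv]
      obtain ⟨S', d', ch', hrun, hinv', hpre, hdis, hfls⟩ :=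
        ih hsub' d S ch ⟨hnd, h1S, hSK, hit, hcl⟩
      refine ⟨S', d', ch', by rw [hred, hrun], hinv', hpre, hdis, ?_⟩
      intro hf
      obtain ⟨h1, h2, h3⟩ := hfls hf
      exact ⟨h1, h2, by
        intro p hp
        rcases List.mem_cons.mp hp with rfl | hp'
        · simp [hu, hv]
        · exact h3 p hp'⟩
    · -- u known, v fresh: insert v with depth Dp u + 1
      have huK : u ∈ K := hSK u hu
      obtain ⟨h1K, h2K, hΔ⟩ := ht.edgeK (u, v) hmemE (Or.inl huK)
      have hDv : Dp v = Dp u + 1 := by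
        rcases hΔ with h | h
        · -- Dp u = Dp v + 1 : then v would be u's (unique) parent, already in S
          exfalso
          have hu1 : u ≠ 1 := by
            intro h1
            rw [h1, ht.d1] at h
            omega
          obtain ⟨w, hwS, hwadj, hwd⟩ := hcl u hu hu1
          have : w = v :=
            ht.par_un u huK w v hwadj (Or.inr hmemE) hwd h
          exact hv (this ▸ hwS)
        · exact h
      have hgu : d.getD u 0 = (Dp u : Int) :=
        pvBInv_getD ⟨hnd, h1S, hSK, hit, hcl⟩ hu
      have hcontv : d.contains v = false := by rw [hcv]; simp [hv]
      have hred : pvSweepB ((u, v) :: es) d ch =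
          pvSweepB es (d.insert v (d.getD u 0 + 1)) true := by
        simp [pvSweepB, hcu, hcv, hu, hv]
      have hit2 : (d.insert v (d.getD u 0 + 1)).items =
          (S ++ [v]).map (fun w => (w, (Dp w : Int))) := by
        rw [PySem.Dict.items_insert_of_not_contains _ _ hcontv, hit, hgu]
        have h' : ((Dp u : Int) + 1) = ((Dp v : Int)) := by rw [hDv]; push_cast; ring
        simp [h']
      have hinv2 : pvBInv edges K Dp (S ++ [v]) (d.insert v (d.getD u 0 + 1)) := by
        refine ⟨?_, by simp [h1S], ?_, hit2, ?_⟩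
        · exact hnd.append (List.nodup_singleton _)
            (by simpa [List.disjoint_singleton] using hv)
        · intro z hz
          rcases List.mem_append.mp hz with h | h
          · exact hSK z h
          · simp only [List.mem_singleton] at h
            exact h ▸ h2K
        · intro z hz hz1
          rcases List.mem_append.mp hz with h | h
          · obtain ⟨w, hwS, hwa, hwd⟩ := hcl z h hz1
            exact ⟨w, List.mem_append_left _ hwS, hwa, hwd⟩
          · simp only [List.mem_singleton] at h
            subst h
            exact ⟨u, List.mem_append_left _ hu, Or.inl hmemE, hDv⟩
      obtain ⟨S', d', ch', hrun, hinv', ⟨t, hpre⟩, hdis, _⟩ :=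
        ih hsub' _ (S ++ [v]) true hinv2
      have hch' : ch' = true := by
        rcases hdis with h | h
        · exact h
        · exact h.1
      refine ⟨S', d', ch', by rw [hred, hrun], hinv',
        ⟨[v] ++ t, by rw [hpre, List.append_assoc]⟩,
        Or.inr ⟨hch', ?_⟩, fun hf => absurd (hf ▸ hch') (by simp)⟩
      rw [hpre]
      simp
    · -- v known, u fresh: insert u with depth Dp v + 1
      have hvK : v ∈ K := hSK v hv
      obtain ⟨h1K, h2K, hΔ⟩ := ht.edgeK (u, v) hmemE (Or.inr hvK)
      have hDu : Dp u = Dp v + 1 := by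
        rcases hΔ with h | h
        · exact h
        · exfalso
          have hv1 : v ≠ 1 := by
            intro h1
            rw [h1, ht.d1] at h
            omega
          obtain ⟨w, hwS, hwadj, hwd⟩ := hcl v hv hv1
          have : w = u :=
            ht.par_un v hvK w u hwadj (Or.inl hmemE) hwd h
          exact hu (this ▸ hwS)
      have hgv : d.getD v 0 = (Dp v : Int) :=
        pvBInv_getD ⟨hnd, h1S, hSK, hit, hcl⟩ hv
      have hcontu : d.contains u = false := by rw [hcu]; simp [hu]
      have hred : pvSweepB ((u, v) :: es) d ch =
          pvSweepB es (d.insert u (d.getD v 0 + 1)) true := by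
        simp [pvSweepB, hcu, hcv, hu, hv]
      have hit2 : (d.insert u (d.getD v 0 + 1)).items =
          (S ++ [u]).map (fun w => (w, (Dp w : Int))) := by
        rw [PySem.Dict.items_insert_of_not_contains _ _ hcontu, hit, hgv]
        have h' : ((Dp v : Int) + 1) = ((Dp u : Int)) := by rw [hDu]; push_cast; ring
        simp [h']
      have hinv2 : pvBInv edges K Dp (S ++ [u]) (d.insert u (d.getD v 0 + 1)) := by
        refine ⟨?_, by simp [h1S], ?_, hit2, ?_⟩
        · exact hnd.append (List.nodup_singleton _)
            (by simpa [List.disjoint_singleton] using hu)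
        · intro z hz
          rcases List.mem_append.mp hz with h | h
          · exact hSK z h
          · simp only [List.mem_singleton] at h
            exact h ▸ h1K
        · intro z hz hz1
          rcases List.mem_append.mp hz with h | h
          · obtain ⟨w, hwS, hwa, hwd⟩ := hcl z h hz1
            exact ⟨w, List.mem_append_left _ hwS, hwa, hwd⟩
          · simp only [List.mem_singleton] at h
            subst h
            exact ⟨v, List.mem_append_left _ hv, Or.inr hmemE, hDu⟩
      obtain ⟨S', d', ch', hrun, hinv', ⟨t, hpre⟩, hdis, _⟩ :=
        ih hsub' _ (S ++ [u]) true hinv2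
      have hch' : ch' = true := by
        rcases hdis with h | h
        · exact h
        · exact h.1
      refine ⟨S', d', ch', by rw [hred, hrun], hinv',
        ⟨[u] ++ t, by rw [hpre, List.append_assoc]⟩,
        Or.inr ⟨hch', ?_⟩, fun hf => absurd (hf ▸ hch') (by simp)⟩
      rw [hpre]
      simp
    · -- both fresh: skip
      have hred : pvSweepB ((u, v) :: es) d ch = pvSweepB es d ch := by
        simp [pvSweepB, hcu, hcv, hu, hv]
      obtain ⟨S', d', ch', hrun, hinv', hpre, hdis, hfls⟩ :=
        ih hsub' d S ch ⟨hnd, h1S, hSK, hit, hcl⟩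
      refine ⟨S', d', ch', by rw [hred, hrun], hinv', hpre, hdis, ?_⟩
      intro hf
      obtain ⟨h1, h2, h3⟩ := hfls hf
      exact ⟨h1, h2, by
        intro p hp
        rcases List.mem_cons.mp hp with rfl | hp'
        · simp [hu, hv]
        · exact h3 p hp'⟩

lemma pvSetFull {K S : List Int} (hndS : S.Nodup) (hSK : ∀ v ∈ S, v ∈ K)
    (hndK : K.Nodup) (hlen : K.length ≤ S.length) : ∀ x ∈ K, x ∈ S := by
  have hsub : S.toFinset ⊆ K.toFinset := by
    intro z hz
    rw [List.mem_toFinset] at hz ⊢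
    exact hSK z hz
  have hcards : K.toFinset.card ≤ S.toFinset.card := by
    rw [List.toFinset_card_of_nodup hndS, List.toFinset_card_of_nodup hndK]
    exact hlen
  have heq := Finset.eq_of_subset_of_card_le hsub hcards
  intro x hx
  have : x ∈ S.toFinset := heq ▸ List.mem_toFinset.mpr hx
  exact List.mem_toFinset.mp this

lemma pvRelaxRun {edges : List (Int × Int)} {K : List Int} {Dp : Int → Nat}
    (ht : PvTree edges K Dp) :
    ∀ (fuel : Nat) (S : List Int) (d : PySem.Dict Int Int), pvBInv edges K Dp S d →
      K.length ≤ S.length + fuel →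
      ∃ S', pvBInv edges K Dp S' (pvRelaxB edges fuel d) ∧ (∃ t, S' = S ++ t) ∧
        (∀ p ∈ edges, (p.1 ∈ S' ↔ p.2 ∈ S')) := by
  intro fuel
  induction fuel with
  | zero =>
    intro S d hinv hlen
    refine ⟨S, hinv, ⟨[], by simp⟩, ?_⟩
    have hfull := pvSetFull hinv.1 hinv.2.2.1 ht.ndK (by omega)
    intro p hp
    constructor
    · intro h
      exact hfull _ (ht.edgeK p hp (Or.inl (hinv.2.2.1 _ h))).2.1
    · intro h
      exact hfull _ (ht.edgeK p hp (Or.inr (hinv.2.2.1 _ h))).1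
  | succ f ihf =>
    intro S d hinv hlen
    obtain ⟨S1, d1, ch1, hrun, hinv1, ⟨t, hpre⟩, hdis, hfls⟩ :=
      pvSweepStep ht edges (fun p hp => hp) d S false hinv
    cases ch1 with
    | true =>
      have hlt : S.length < S1.length := by
        rcases hdis with h | h
        · exact absurd h (by simp)
        · exact h.2
      have hred : pvRelaxB edges (f + 1) d = pvRelaxB edges f d1 := by
        simp [pvRelaxB, hrun]
      obtain ⟨S', hinv', ⟨t', hpre'⟩, hclos⟩ := ihf S1 d1 hinv1 (by omega)
      exact ⟨S', by rw [hred]; exact hinv',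
        ⟨t ++ t', by rw [hpre', hpre, List.append_assoc]⟩, hclos⟩
    | false =>
      obtain ⟨hd1, hS1, hclos⟩ := hfls rfl
      have hred : pvRelaxB edges (f + 1) d = d1 := by
        simp [pvRelaxB, hrun]
      refine ⟨S, ?_, ⟨[], by simp⟩, ?_⟩
      · rw [hred, hd1]
        exact hinv
      · exact hS1 ▸ hclos

-- B's port computes the same answer
lemma pvB_eval {edges : List (Int × Int)} {K : List Int} {Dp : Int → Nat}
    (ht : PvTree edges K Dp) :
    assignEdgeWeights_alt edges =
      (if pvMaxD K Dp = 0 then 0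
       else PySem.Int.powMod 2 ((pvMaxD K Dp) - 1).toNat (10 ^ 9 + 7)) := by
  have hinv0 : pvBInv edges K Dp [1] (PySem.Dict.empty.insert 1 0) := by
    refine ⟨by simp, by simp, by simpa using ht.oneK, ?_, ?_⟩
    · rw [PySem.Dict.items_insert_of_not_contains _ _ (by simp)]
      simp only [List.map_cons, List.map_nil, ht.d1, Nat.cast_zero]
      rfl
    · intro v hv hv1
      simp only [List.mem_singleton] at hv
      exact absurd hv hv1
  obtain ⟨S', hinv', ⟨t, hpre⟩, hclos⟩ :=
    pvRelaxRun ht (2 * edges.length + 2) [1] _ hinv0 (by have := ht.klen; simp; omega)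
  have hKS : ∀ x ∈ K, x ∈ S' := by
    have H : ∀ k : Nat, ∀ x ∈ K, Dp x = k → x ∈ S' := by
      intro k
      induction k using Nat.strong_induction_on with
      | _ k ihk =>
        intro x hx hdx
        by_cases hx1 : x = 1
        · exact hx1 ▸ hinv'.2.1
        · obtain ⟨p, hpK, hadj, hd⟩ := ht.par_ex x hx hx1
          have hpS : p ∈ S' := ihk (Dp p) (by omega) p hpK rfl
          rcases hadj with hm | hm
          · exact (hclos _ hm).mp hpS
          · exact (hclos _ hm).mpr hpS
    exact fun x hx => H (Dp x) x hx rfl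
  obtain ⟨hndS, h1S, hSK, hit, _⟩ := hinv'
  have hSeq : S' = 1 :: t := by simpa using hpre
  have hvals : (pvRelaxB edges (2 * edges.length + 2) (PySem.Dict.empty.insert 1 0)).values
      = (0 : Int) :: t.map (fun v => (Dp v : Int)) := by
    simp only [PySem.Dict.values, hit, hSeq, List.map_cons, List.map_map]
    simp [ht.d1, Function.comp]
  have hmd : (t.map (fun v => (Dp v : Int))).foldl max 0 = pvMaxD K Dp := by
    have hMDfold : pvMaxD K Dp
        = K.foldl (fun acc y => max acc ((Dp y : Int))) 0 := by
      unfold pvMaxD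
      rw [List.foldl_map]
    have h1 := PySem.List.le_foldl_max_int K (fun x => (Dp x : Int)) 0
    have h2 := PySem.List.le_foldl_max (t.map (fun v => (Dp v : Int))) 0
    apply le_antisymm
    · rcases PySem.List.foldl_max_mem (t.map (fun v => (Dp v : Int))) 0 with h0 | hm
      · rw [h0, hMDfold]
        exact h1.1
      · obtain ⟨x, hxt, hxe⟩ := List.mem_map.mp hm
        rw [← hxe, hMDfold]
        exact h1.2 x (hSK x (by rw [hSeq]; exact List.mem_cons_of_mem _ hxt))
    · rcases PySem.List.foldl_max_mem (K.map (fun v => (Dp v : Int))) 0 with h0 | hm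
      · unfold pvMaxD
        rw [h0]
        exact h2.1
      · obtain ⟨x, hxK, hxe⟩ := List.mem_map.mp hm
        unfold pvMaxD
        rw [← hxe]
        have hxS := hKS x hxK
        rw [hSeq] at hxS
        rcases List.mem_cons.mp hxS with rfl | hxt
        · rw [ht.d1]
          simpa using h2.1
        · exact h2.2 _ (List.mem_map.mpr ⟨x, hxt, rfl⟩)
  unfold assignEdgeWeights_alt
  dsimp only
  rw [hvals, PySem.List.max?_id_cons, hmd]

-- ===== VERDICT (by name: the statement is the Claim_ definition above) =====
theorem assignEdgeWeights_spec : Claim_equal_assignEdgeWeights := by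
  intro edges _ hpre
  unfold Spec_assignEdgeWeights
  obtain ⟨K, Dp, ht⟩ := pvGhost edges hpre
  rw [pvA_eval ht, pvB_eval ht]
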